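-- pv_equiv track=rewrite | github.com/th3d33pblu3/AOC | AOC2022/Day 16/solve.py | get_valve_rooms_min_steps
-- ===== SOURCE A (Python) =====
-- from queue import Queue
--
-- def get_all_rooms_min_steps_from_room(starting_room, all_room_names: list, connections: dict):
--     steps_from_starting_room = {}
--     for room in all_room_names:
--         steps_from_starting_room[room] = -1
--
--     frontier = Queue()
--     frontier.put(starting_room)
--     steps_from_starting_room[starting_room] = 0
--
--     while frontier.qsize() != 0:
--         curr_room = frontier.get()
--         curr_room_steps = steps_from_starting_room.get(curr_room)
--         for next_room in connections.get(curr_room):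
--             if steps_from_starting_room.get(next_room) == -1:
--                 steps_from_starting_room[next_room] = curr_room_steps + 1
--                 frontier.put(next_room)
--
--     return steps_from_starting_room
--
-- def get_valve_rooms_min_steps(all_room_names: list, connections: dict, valve_room_names: list):
--     valve_room_min_steps = {}
--     for starting_room in valve_room_names:
--         all_rooms_min_steps_from_starting_room = get_all_rooms_min_steps_from_room(starting_room, all_room_names, connections)
--
--         valve_room_steps_from_starting_room = {}
--         for room in valve_room_names:
--             valve_room_steps_from_starting_room[room] = all_rooms_min_steps_from_starting_room[room]
--
--         valve_room_min_steps[starting_room] = valve_room_steps_from_starting_room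
--
--     return valve_room_min_steps
-- ===== SOURCE B (Python) =====
-- def get_valve_rooms_min_steps(all_room_names: list, connections: dict, valve_room_names: list):
--     # Floyd-Warshall all-pairs shortest paths instead of one BFS per valve room.
--     # dist[(i, j)] is None while j is not known reachable from i ("infinity");
--     # unreachable pairs are reported as -1, matching the BFS sentinel.
--     dist = {}
--     for i in all_room_names:
--         for j in all_room_names:
--             dist[(i, j)] = None
--     for i in all_room_names:
--         for n in connections.get(i, []):
--             if (i, n) in dist:
--                 dist[(i, n)] = 1
--     for i in all_room_names:
--         dist[(i, i)] = 0
--     for k in all_room_names: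
--         row_k = {}
--         for j in all_room_names:
--             row_k[j] = dist[(k, j)]
--         for i in all_room_names:
--             dik = dist[(i, k)]
--             if dik is None:
--                 continue
--             for j in all_room_names:
--                 dkj = row_k[j]
--                 if dkj is None:
--                     continue
--                 dij = dist[(i, j)]
--                 if dij is None or dik + dkj < dij:
--                     dist[(i, j)] = dik + dkj
--     result = {}
--     for s in valve_room_names:
--         row = {}
--         for t in valve_room_names:
--             d = dist[(s, t)]
--             row[t] = d if d is not None else -1
--         result[s] = row
--     return result
-- ===== Notes on version B (the rewrite author's own statement) =====
-- stated objective: alternative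
-- what changed: One queue-based BFS per valve room is replaced by a single Floyd-Warshall all-pairs shortest-path computation: a dist matrix over all rooms (None = infinity, edges = 1, diagonal = 0) relaxed by the standard triple loop over intermediate rooms, then restricted to the valve rooms with infinity rendered as -1.
-- outside the precondition, e.g. on get_valve_rooms_min_steps(['A', 'B'], {'A': []}, ['A']): A returns {'A': {'A': 0}}, B returns {'A': {'A': 0}}; on get_valve_rooms_min_steps(['B'], {'A': ['A'], 'B': []}, ['A']): A returns {'A': {'A': 0}}, B raises KeyError
import Mathlib
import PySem

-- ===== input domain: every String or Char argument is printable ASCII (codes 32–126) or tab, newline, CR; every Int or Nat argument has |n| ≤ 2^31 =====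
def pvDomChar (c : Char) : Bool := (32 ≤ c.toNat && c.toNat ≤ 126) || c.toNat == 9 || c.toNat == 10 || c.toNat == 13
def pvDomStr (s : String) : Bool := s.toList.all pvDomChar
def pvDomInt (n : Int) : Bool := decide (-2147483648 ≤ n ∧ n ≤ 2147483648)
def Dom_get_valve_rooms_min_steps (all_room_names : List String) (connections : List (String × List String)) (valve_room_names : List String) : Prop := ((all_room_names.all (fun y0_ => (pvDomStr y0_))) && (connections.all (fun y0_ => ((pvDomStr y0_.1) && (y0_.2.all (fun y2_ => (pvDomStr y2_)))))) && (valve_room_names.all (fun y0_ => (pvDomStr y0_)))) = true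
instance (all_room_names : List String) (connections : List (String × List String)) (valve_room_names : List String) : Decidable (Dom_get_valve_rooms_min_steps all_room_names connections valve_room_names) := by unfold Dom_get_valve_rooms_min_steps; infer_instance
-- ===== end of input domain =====

-- B replaces the per-valve-room queue BFS by a single Floyd–Warshall all-pairs shortest-path
-- computation over a distance matrix (none = infinity, rendered -1), restricted to the valve rooms
-- at the end (objective: alternative algorithm; mutates nothing).

-- ===== PORT A =====
-- Python's queue.Queue is ported as a list: get() takes the head, put() appends at the back.
-- The recursion is driven by fuel counting dequeues; inside Pre_ every room is enqueued at most
-- once, so all_room_names.length + 1 dequeues always suffice (proved via pvCnt in the lemmas below).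
def pvStepsInit (all_room_names : List String) : PySem.Dict String Int :=
  all_room_names.foldl (fun d room => d.insert room (-1)) PySem.Dict.empty

def pvBFSA (conn : PySem.Dict String (List String)) :
    Nat → PySem.Dict String Int → List String → PySem.Dict String Int
  | 0, d, _ => d
  | _ + 1, d, [] => d
  | fuel + 1, d, curr :: rest =>
    -- Python: curr_room_steps = steps_from_starting_room.get(curr_room); inside Pre_ curr is a key
    let steps := d.getD curr 0
    match conn.get? curr with
    | none => d  -- Python raises TypeError here (connections.get(curr) is None); outside Pre_
    | some children =>
      let st := children.foldl
        (fun (st : PySem.Dict String Int × List String) n =>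
          if st.1.get? n = some (-1) then (st.1.insert n (steps + 1), st.2 ++ [n]) else st)
        (d, rest)
      pvBFSA conn fuel st.1 st.2

def get_valve_rooms_min_steps (all_room_names : List String)
    (connections : List (String × List String)) (valve_room_names : List String) :
    List (String × List (String × Int)) :=
  let conn := PySem.Dict.ofList connections
  (valve_room_names.foldl
    (fun (acc : PySem.Dict String (PySem.Dict String Int)) s =>
      let dall := pvBFSA conn (all_room_names.length + 1) ((pvStepsInit all_room_names).insert s 0) [s]
      -- Python: all_rooms_min_steps_from_starting_room[room] (KeyError outside Pre_; default unused inside Pre_)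
      let inner := valve_room_names.foldl
        (fun (m : PySem.Dict String Int) room => m.insert room (dall.getD room 0)) PySem.Dict.empty
      acc.insert s inner)
    PySem.Dict.empty).items.map (fun p => (p.1, p.2.items))

-- ===== PORT B =====
-- Floyd–Warshall. The dist matrix is one dict keyed by (room, room) pairs, value Option Int
-- (none = Python None = infinity). dist[(k, j)] / dist[(i, k)] / dist[(i, j)] lookups inside the
-- triple loop are ported as getD _ none: their keys are always present (all pairs were inserted by
-- the first loop), so Python's KeyError cannot fire there. The final dist[(s, t)] lookup is also
-- getD: under Pre_ both s and t are room names, so the key is present (KeyError is outside Pre_).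
def pvFWRelaxRow (all_room_names : List String) (rowk : PySem.Dict String (Option Int))
    (i : String) (dik : Int) (d : PySem.Dict (String × String) (Option Int)) :
    PySem.Dict (String × String) (Option Int) :=
  all_room_names.foldl
    (fun d j =>
      match rowk.getD j none with
      | none => d
      | some dkj =>
        match d.getD (i, j) none with
        | none => d.insert (i, j) (some (dik + dkj))
        | some dij => if dik + dkj < dij then d.insert (i, j) (some (dik + dkj)) else d)
    d

def pvFWRound (all_room_names : List String) (d : PySem.Dict (String × String) (Option Int))
    (k : String) : PySem.Dict (String × String) (Option Int) :=
  let rowk := all_room_names.foldl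
    (fun (row : PySem.Dict String (Option Int)) j => row.insert j (d.getD (k, j) none))
    PySem.Dict.empty
  all_room_names.foldl
    (fun d i =>
      match d.getD (i, k) none with
      | none => d  -- Python: continue
      | some dik => pvFWRelaxRow all_room_names rowk i dik d)
    d

def get_valve_rooms_min_steps_alt (all_room_names : List String)
    (connections : List (String × List String)) (valve_room_names : List String) :
    List (String × List (String × Int)) :=
  let conn := PySem.Dict.ofList connections
  let d0 := all_room_names.foldl
    (fun d i => all_room_names.foldl
      (fun (d : PySem.Dict (String × String) (Option Int)) j => d.insert (i, j) none) d)
    PySem.Dict.empty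
  let d1 := all_room_names.foldl
    (fun d i => (conn.getD i []).foldl
      (fun (d : PySem.Dict (String × String) (Option Int)) n =>
        if d.contains (i, n) then d.insert (i, n) (some 1) else d) d)
    d0
  let d2 := all_room_names.foldl
    (fun (d : PySem.Dict (String × String) (Option Int)) i => d.insert (i, i) (some 0)) d1
  let d3 := all_room_names.foldl (pvFWRound all_room_names) d2
  (valve_room_names.foldl
    (fun (acc : PySem.Dict String (PySem.Dict String Int)) s =>
      let row := valve_room_names.foldl
        (fun (row : PySem.Dict String Int) t =>
          row.insert t (match d3.getD (s, t) none with | some v => v | none => -1))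
        PySem.Dict.empty
      acc.insert s row)
    PySem.Dict.empty).items.map (fun p => (p.1, p.2.items))

-- ===== PRECONDITION & SPEC =====
-- Pre_ excludes exactly the raising corners, slightly conservatively: A raises TypeError when a
-- BFS reaches a room with no connections entry and KeyError when a valve room is missing from the
-- final lookup table; A's exact raising condition is a reachability property with no closed form,
-- so Pre_ also excludes some returning inputs (an unreachable room without a connections entry, a
-- lone valve room absent from all_room_names) — see the cites in the claim.
def Pre_get_valve_rooms_min_steps (all_room_names : List String)
    (connections : List (String × List String)) (valve_room_names : List String) : Prop :=
  valve_room_names = [] ∨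
    ((∀ v ∈ valve_room_names, v ∈ all_room_names) ∧
     (∀ r ∈ all_room_names, r ∈ connections.map Prod.fst))

instance (all_room_names : List String) (connections : List (String × List String)) (valve_room_names : List String) : Decidable (Pre_get_valve_rooms_min_steps all_room_names connections valve_room_names) := by
  unfold Pre_get_valve_rooms_min_steps; infer_instance

def pvWitness_get_valve_rooms_min_steps : List String × (List (String × List String)) × List String :=
  (["AA", "BB"], ([("AA", ["BB"]), ("BB", [])], ["AA", "BB"]))

def Spec_get_valve_rooms_min_steps (all_room_names : List String)
    (connections : List (String × List String)) (valve_room_names : List String)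
    (out : List (String × List (String × Int))) : Prop :=
  out = get_valve_rooms_min_steps_alt all_room_names connections valve_room_names

instance (all_room_names : List String) (connections : List (String × List String)) (valve_room_names : List String) (out : List (String × List (String × Int))) : Decidable (Spec_get_valve_rooms_min_steps all_room_names connections valve_room_names out) := by
  unfold Spec_get_valve_rooms_min_steps; infer_instance

-- ===== CLAIM =====
def Claim_equal_get_valve_rooms_min_steps : Prop :=
  ∀ (all_room_names : List String) (connections : List (String × List String)) (valve_room_names : List String),
    Dom_get_valve_rooms_min_steps all_room_names connections valve_room_names →
    Pre_get_valve_rooms_min_steps all_room_names connections valve_room_names →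
    Spec_get_valve_rooms_min_steps all_room_names connections valve_room_names
      (get_valve_rooms_min_steps all_room_names connections valve_room_names)

-- ===== LEMMAS AND PROOFS =====


-- ================= shortest-path specification =================

-- Edge relation of the graph both programs explore: u → v when v is listed under u in
-- connections AND v is a room name (A's BFS only ever marks rooms that are dict keys, i.e.
-- elements of all_room_names; B's matrix only has room×room cells).
def pvE (conn : PySem.Dict String (List String)) (all : List String) (u v : String) : Prop :=
  v ∈ conn.getD u [] ∧ v ∈ all

-- pvIsPath E u ws v: ws is the list of intermediate vertices of a walk u → … → v with ≥ 1 edge.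
def pvIsPath (E : String → String → Prop) : String → List String → String → Prop
  | u, [], v => E u v
  | u, w :: ws, v => E u w ∧ pvIsPath E w ws v

-- "there is a walk of exactly n edges from s to r" (n = 0 only the empty walk at s).
def pvHPL (E : String → String → Prop) (s r : String) (n : Nat) : Prop :=
  (n = 0 ∧ r = s) ∨ ∃ ws, pvIsPath E s ws r ∧ ws.length + 1 = n

-- n is THE distance from s to r.
def pvMinD (E : String → String → Prop) (s r : String) (n : Nat) : Prop :=
  pvHPL E s r n ∧ ∀ m, pvHPL E s r m → n ≤ m

-- the Int both programs report for the pair (s, r).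
def pvAns (E : String → String → Prop) (s r : String) (v : Int) : Prop :=
  (∃ n : Nat, v = (n : Int) ∧ pvMinD E s r n) ∨ (v = -1 ∧ ∀ n, ¬ pvHPL E s r n)

lemma pvIsPath_append {E : String → String → Prop} :
    ∀ (ws1 : List String) (i k : String) (ws2 : List String) (j : String),
      pvIsPath E i ws1 k → pvIsPath E k ws2 j → pvIsPath E i (ws1 ++ k :: ws2) j := by
  intro ws1
  induction ws1 with
  | nil => intro i k ws2 j h1 h2; exact ⟨h1, h2⟩
  | cons a t ih => intro i k ws2 j h1 h2; exact ⟨h1.1, ih a k ws2 j h1.2 h2⟩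

lemma pvIsPath_concat_iff {E : String → String → Prop} :
    ∀ (ws : List String) (i u j : String),
      pvIsPath E i (ws ++ [u]) j ↔ pvIsPath E i ws u ∧ E u j := by
  intro ws
  induction ws with
  | nil => intro i u j; simp [pvIsPath]
  | cons a t ih =>
    intro i u j
    simp only [List.cons_append, pvIsPath, ih, and_assoc]

lemma pvIsPath_split_first {E : String → String → Prop} {k : String} :
    ∀ (ws : List String) (i j : String), pvIsPath E i ws j → k ∈ ws →
      ∃ ws1 ws2, ws = ws1 ++ k :: ws2 ∧ k ∉ ws1 ∧ pvIsPath E i ws1 k ∧ pvIsPath E k ws2 j := by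
  intro ws
  induction ws with
  | nil => intro i j _ h; cases h
  | cons a t ih =>
    intro i j hp hmem
    by_cases hak : a = k
    · subst hak
      exact ⟨[], t, rfl, by simp, hp.1, hp.2⟩
    · have hkt : k ∈ t := by
        rcases List.mem_cons.mp hmem with h | h
        · exact absurd h.symm hak
        · exact h
      obtain ⟨ws1, ws2, heq, hnot, h1, h2⟩ := ih a j hp.2 hkt
      exact ⟨a :: ws1, ws2, by rw [heq]; rfl, by simp only [List.mem_cons]; rintro (h | h); exact hak h.symm; exact hnot h, ⟨hp.1, h1⟩, h2⟩

lemma pvIsPath_drop_loops {E : String → String → Prop} {k : String} :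
    ∀ (n : Nat) (ws : List String) (j : String), ws.length ≤ n → pvIsPath E k ws j →
      ∃ ws2, pvIsPath E k ws2 j ∧ k ∉ ws2 ∧ ws2.length ≤ ws.length ∧ ∀ w ∈ ws2, w ∈ ws := by
  intro n
  induction n with
  | zero =>
    intro ws j hlen hp
    have : ws = [] := List.eq_nil_of_length_eq_zero (Nat.le_zero.mp hlen)
    subst this
    exact ⟨[], hp, by simp, by simp, by simp⟩
  | succ n ih =>
    intro ws j hlen hp
    by_cases hk : k ∈ ws
    · obtain ⟨ws1, ws2', heq, _, _, h2⟩ := pvIsPath_split_first ws k j hp hk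
      have hlen2 : ws2'.length ≤ n := by
        have : ws.length = ws1.length + 1 + ws2'.length := by simp [heq]; omega
        omega
      obtain ⟨ws2, hp2, hk2, hle2, hsub2⟩ := ih ws2' j hlen2 h2
      refine ⟨ws2, hp2, hk2, ?_, ?_⟩
      · have : ws.length = ws1.length + 1 + ws2'.length := by simp [heq]; omega
        omega
      · intro w hw
        have := hsub2 w hw
        rw [heq]
        simp only [List.mem_append, List.mem_cons]
        right; right; exact this
    · exact ⟨ws, hp, hk, le_refl _, fun w h => h⟩

lemma pvSplitThrough {E : String → String → Prop} {k : String} {ws : List String} {i j : String}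
    (hp : pvIsPath E i ws j) (hk : k ∈ ws) :
    ∃ ws1 ws2, pvIsPath E i ws1 k ∧ pvIsPath E k ws2 j ∧ k ∉ ws1 ∧ k ∉ ws2 ∧
      ws1.length + ws2.length + 1 ≤ ws.length ∧ (∀ w ∈ ws1, w ∈ ws) ∧ (∀ w ∈ ws2, w ∈ ws) := by
  obtain ⟨ws1, ws2', heq, hnot1, h1, h2⟩ := pvIsPath_split_first ws i j hp hk
  obtain ⟨ws2, hp2, hnot2, hle2, hsub2⟩ := pvIsPath_drop_loops ws2'.length ws2' j (le_refl _) h2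
  have hlen : ws.length = ws1.length + 1 + ws2'.length := by simp [heq]; omega
  refine ⟨ws1, ws2, h1, hp2, hnot1, hnot2, by omega, ?_, ?_⟩
  · intro w hw; rw [heq]; simp only [List.mem_append, List.mem_cons]; left; exact hw
  · intro w hw
    have := hsub2 w hw
    rw [heq]; simp only [List.mem_append, List.mem_cons]; right; right; exact this

lemma pvHPL_zero {E : String → String → Prop} (s : String) : pvHPL E s s 0 :=
  Or.inl ⟨rfl, rfl⟩

lemma pvHPL_step {E : String → String → Prop} {s u r : String} {n : Nat}
    (h : pvHPL E s u n) (he : E u r) : pvHPL E s r (n + 1) := by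
  rcases h with ⟨hn, hu⟩ | ⟨ws, hp, hl⟩
  · subst hu; exact Or.inr ⟨[], by simpa [pvIsPath] using he, by simpa using hn⟩
  · refine Or.inr ⟨ws ++ [u], ?_, by simp; omega⟩
    exact (pvIsPath_concat_iff ws s u r).mpr ⟨hp, he⟩

lemma pvHPL_destruct {E : String → String → Prop} {s r : String} {n : Nat}
    (h : pvHPL E s r (n + 1)) : ∃ u, pvHPL E s u n ∧ E u r := by
  rcases h with ⟨hn, _⟩ | ⟨ws, hp, hl⟩
  · omega
  · rcases List.eq_nil_or_concat ws with hnil | ⟨ws', u, heq⟩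
    · subst hnil
      simp only [List.length_nil] at hl
      refine ⟨s, ?_, hp⟩
      have : n = 0 := by omega
      subst this; exact pvHPL_zero s
    · subst heq
      rw [List.concat_eq_append] at hp hl
      obtain ⟨hp', he⟩ := (pvIsPath_concat_iff ws' s u r).mp hp
      refine ⟨u, Or.inr ⟨ws', hp', ?_⟩, he⟩
      simp at hl; omega

lemma pvExistsMinD {E : String → String → Prop} {s r : String} :
    ∀ n, pvHPL E s r n → ∃ m, m ≤ n ∧ pvMinD E s r m := by
  intro n
  induction n using Nat.strong_induction_on with
  | _ n ih =>
    intro h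
    by_cases hmin : ∀ m, pvHPL E s r m → n ≤ m
    · exact ⟨n, le_refl n, h, hmin⟩
    · push Not at hmin
      obtain ⟨m, hm, hlt⟩ := hmin
      obtain ⟨m', hle, hmin'⟩ := ih m hlt hm
      exact ⟨m', by omega, hmin'⟩

lemma pvMinD_unique {E : String → String → Prop} {s r : String} {n m : Nat}
    (h1 : pvMinD E s r n) (h2 : pvMinD E s r m) : n = m :=
  Nat.le_antisymm (h1.2 m h2.1) (h2.2 n h1.1)

lemma pvMinD_pred {E : String → String → Prop} {s r : String} {n : Nat}
    (h : pvMinD E s r (n + 1)) : ∃ u, E u r ∧ pvMinD E s u n := by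
  obtain ⟨u, hu, he⟩ := pvHPL_destruct h.1
  obtain ⟨m, hle, hmin⟩ := pvExistsMinD _ hu
  have : n + 1 ≤ m + 1 := h.2 (m + 1) (pvHPL_step hmin.1 he)
  have hm : m = n := by omega
  subst hm
  exact ⟨u, he, hmin⟩

lemma pvAns_unique {E : String → String → Prop} {s r : String} {v w : Int}
    (h1 : pvAns E s r v) (h2 : pvAns E s r w) : v = w := by
  rcases h1 with ⟨n, hv, hn⟩ | ⟨hv, hno⟩
  · rcases h2 with ⟨m, hw, hm⟩ | ⟨hw, hno'⟩
    · rw [hv, hw, pvMinD_unique hn hm]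
    · exact absurd hn.1 (hno' n)
  · rcases h2 with ⟨m, hw, hm⟩ | ⟨hw, _⟩
    · exact absurd hm.1 (hno m)
    · rw [hv, hw]

-- every vertex on a pvE-walk is a room name
lemma pvE_path_mem {conn : PySem.Dict String (List String)} {all : List String} :
    ∀ (ws : List String) (i j : String), pvIsPath (pvE conn all) i ws j → ∀ w ∈ ws, w ∈ all := by
  intro ws
  induction ws with
  | nil => intro i j _ w hw; cases hw
  | cons a t ih =>
    intro i j hp w hw
    rcases List.mem_cons.mp hw with h | h
    · subst h; exact hp.1.2
    · exact ih a j hp.2 w h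


-- ================= A's queue BFS ≃ a level-synchronous BFS (simulation) =================
-- pvLevelB is a PROOF-INTERNAL level-synchronous BFS: it is related to A's queue BFS by the
-- simulation pvRel below, and to the shortest-path spec by the invariant pvInv further down.
def pvLevelB (rooms : PySem.Set String) (conn : PySem.Dict String (List String)) :
    Nat → PySem.Dict String Int → List String → Int → PySem.Dict String Int
  | 0, d, _, _ => d
  | _ + 1, d, [], _ => d
  | fuel + 1, d, r0 :: frontier, level =>
    let st := (r0 :: frontier).foldl
      (fun (st : PySem.Dict String Int × List String) r =>
        match conn.get? r with
        | none => st
        | some children =>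
          children.foldl
            (fun (st : PySem.Dict String Int × List String) n =>
              if List.contains rooms n && !(st.1.contains n) then (st.1.insert n (level + 1), st.2 ++ [n]) else st)
            st)
      (d, [])
    pvLevelB rooms conn fuel st.1 st.2 (level + 1)

-- Simulation relation between A's sentinel dict and the level BFS's visited-only dict.
def pvRel (R : List String) (dA dB : PySem.Dict String Int) : Prop :=
  ∀ r : String,
    (r ∈ R → (dA.get? r = some (-1) ∧ dB.get? r = none) ∨
       ∃ v, 0 ≤ v ∧ dA.get? r = some v ∧ dB.get? r = some v) ∧
    (r ∉ R → dA.get? r = none ∧ dB.get? r = none)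

-- Number of still-undiscovered rooms (A's remaining -1 entries); the fuel measure.
def pvCnt (R : List String) (d : PySem.Dict String Int) : Nat :=
  (R.filter (fun r => d.get? r == some (-1))).length

lemma pvBFSA_nil (conn : PySem.Dict String (List String)) (fuel : Nat) (d : PySem.Dict String Int) :
    pvBFSA conn fuel d [] = d := by cases fuel <;> rfl

lemma pvBFSA_cons (conn : PySem.Dict String (List String)) (fuel : Nat) (d : PySem.Dict String Int)
    (curr : String) (rest : List String) (children : List String)
    (hc : conn.get? curr = some children) :
    pvBFSA conn (fuel + 1) d (curr :: rest) =
      pvBFSA conn fuel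
        (children.foldl (fun (st : PySem.Dict String Int × List String) n =>
          if st.1.get? n = some (-1) then (st.1.insert n (d.getD curr 0 + 1), st.2 ++ [n]) else st) (d, rest)).1
        (children.foldl (fun (st : PySem.Dict String Int × List String) n =>
          if st.1.get? n = some (-1) then (st.1.insert n (d.getD curr 0 + 1), st.2 ++ [n]) else st) (d, rest)).2 := by
  simp only [pvBFSA, hc]

lemma pvLevelB_cons (R : PySem.Set String) (conn : PySem.Dict String (List String)) (fuel : Nat)
    (d : PySem.Dict String Int) (r0 : String) (fr : List String) (level : Int) :
    pvLevelB R conn (fuel + 1) d (r0 :: fr) level =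
      pvLevelB R conn fuel
        ((r0 :: fr).foldl (fun (st : PySem.Dict String Int × List String) r =>
          match conn.get? r with
          | none => st
          | some children =>
            children.foldl (fun (st : PySem.Dict String Int × List String) n =>
              if List.contains R n && !(st.1.contains n) then (st.1.insert n (level + 1), st.2 ++ [n]) else st) st)
          (d, [])).1
        ((r0 :: fr).foldl (fun (st : PySem.Dict String Int × List String) r =>
          match conn.get? r with
          | none => st
          | some children =>
            children.foldl (fun (st : PySem.Dict String Int × List String) n =>
              if List.contains R n && !(st.1.contains n) then (st.1.insert n (level + 1), st.2 ++ [n]) else st) st)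
          (d, [])).2 (level + 1) := by
  simp only [pvLevelB]

lemma pvLevelB_nil (R : PySem.Set String) (conn : PySem.Dict String (List String)) (fuel : Nat)
    (d : PySem.Dict String Int) (level : Int) : pvLevelB R conn fuel d [] level = d := by
  cases fuel <;> rfl

lemma pvFilter_flip {p q : String → Bool} {l : List String} (hl : l.Nodup) {r : String}
    (hr : r ∈ l) (hp : p r = true) (hq : q r = false) (hagree : ∀ x, x ≠ r → p x = q x) :
    (l.filter q).length + 1 = (l.filter p).length := by
  induction l with
  | nil => cases hr
  | cons a t ih =>
    rcases List.nodup_cons.mp hl with ⟨hna, hnt⟩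
    by_cases ha : a = r
    · subst ha
      have ht : t.filter q = t.filter p := by
        apply List.filter_congr
        intro x hx
        exact (hagree x (fun c => hna (c ▸ hx))).symm
      simp [hp, hq, ht]
    · have hpa : p a = q a := hagree a ha
      have hr' : r ∈ t := by
        rcases List.mem_cons.mp hr with h | h
        · exact absurd h.symm ha
        · exact h
      cases hqa : q a with
      | true => simp [hpa, hqa, ih hnt hr']
      | false => simp [hpa, hqa, ih hnt hr']

lemma pvExpand (R : List String) (hR : R.Nodup) (w : Int) (hw : 0 ≤ w) (cs : List String) :
    ∀ (dA dB : PySem.Dict String Int) (q nxt : List String), pvRel R dA dB →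
    ∃ dA' dB' new,
      cs.foldl (fun (st : PySem.Dict String Int × List String) n =>
          if st.1.get? n = some (-1) then (st.1.insert n w, st.2 ++ [n]) else st) (dA, q)
        = (dA', q ++ new) ∧
      cs.foldl (fun (st : PySem.Dict String Int × List String) n =>
          if List.contains R n && !(st.1.contains n) then (st.1.insert n w, st.2 ++ [n]) else st) (dB, nxt)
        = (dB', nxt ++ new) ∧
      pvRel R dA' dB' ∧
      (∀ r v, 0 ≤ v → dA.get? r = some v → dA'.get? r = some v) ∧
      (∀ r ∈ new, dA'.get? r = some w) ∧
      pvCnt R dA' + new.length = pvCnt R dA := by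
  induction cs with
  | nil =>
    intro dA dB q nxt hrel
    exact ⟨dA, dB, [], by simp, by simp, hrel, fun r v _ h => h, by simp, by simp⟩
  | cons n cs ih =>
    intro dA dB q nxt hrel
    simp only [List.foldl_cons]
    by_cases hc : dA.get? n = some (-1)
    · -- n is discovered now
      have hnR : n ∈ R := by
        by_contra hn
        rw [((hrel n).2 hn).1] at hc
        cases hc
      have hBnone : dB.get? n = none := by
        rcases (hrel n).1 hnR with ⟨_, h2⟩ | ⟨v, hv, hA, _⟩
        · exact h2
        · rw [hA] at hc; injection hc with h; omega
      have hcondB : (List.contains R n && !(dB.contains n)) = true := by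
        rw [PySem.Dict.contains_eq_isSome_get?, hBnone]
        simp [hnR]
      rw [if_pos hc, if_pos hcondB]
      have hrel1 : pvRel R (dA.insert n w) (dB.insert n w) := by
        intro r
        constructor
        · intro hrR
          by_cases hrn : r = n
          · subst hrn
            exact Or.inr ⟨w, hw, PySem.Dict.get?_insert_self _ _ _, PySem.Dict.get?_insert_self _ _ _⟩
          · rw [PySem.Dict.get?_insert_of_ne _ _ hrn, PySem.Dict.get?_insert_of_ne _ _ hrn]
            exact (hrel r).1 hrR
        · intro hrR
          have hrn : r ≠ n := fun c => hrR (c ▸ hnR)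
          rw [PySem.Dict.get?_insert_of_ne _ _ hrn, PySem.Dict.get?_insert_of_ne _ _ hrn]
          exact (hrel r).2 hrR
      obtain ⟨dA', dB', new, hA, hB, hrel', hpres, hnew, hcnt⟩ :=
        ih (dA.insert n w) (dB.insert n w) (q ++ [n]) (nxt ++ [n]) hrel1
      have hpres0 : ∀ (r : String) (v : Int), 0 ≤ v → dA.get? r = some v →
          (dA.insert n w).get? r = some v := by
        intro r v hv hr
        have hrn : r ≠ n := by
          intro c; subst c; rw [hr] at hc; injection hc with h; omega
        rw [PySem.Dict.get?_insert_of_ne _ _ hrn]; exact hr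
      refine ⟨dA', dB', n :: new, ?_, ?_, hrel', ?_, ?_, ?_⟩
      · rw [hA]; simp
      · rw [hB]; simp
      · intro r v hv hr
        exact hpres r v hv (hpres0 r v hv hr)
      · intro r hr
        rcases List.mem_cons.mp hr with h | h
        · subst h
          exact hpres r w hw (PySem.Dict.get?_insert_self _ _ _)
        · exact hnew r h
      · have hflip : pvCnt R (dA.insert n w) + 1 = pvCnt R dA := by
          unfold pvCnt
          apply pvFilter_flip hR hnR
          · show (dA.get? n == some (-1)) = true
            simp [hc]
          · show ((dA.insert n w).get? n == some (-1)) = false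
            rw [PySem.Dict.get?_insert_self]
            simp only [beq_eq_false_iff_ne, ne_eq, Option.some.injEq]
            omega
          · intro x hx
            show (dA.get? x == some (-1)) = ((dA.insert n w).get? x == some (-1))
            rw [PySem.Dict.get?_insert_of_ne _ _ hx]
        simp only [List.length_cons]
        omega
    · -- n is not discovered
      have hcondB : (List.contains R n && !(dB.contains n)) = false := by
        by_cases hnR : n ∈ R
        · rcases (hrel n).1 hnR with ⟨h1, _⟩ | ⟨v, _, _, hB⟩
          · exact absurd h1 hc
          · rw [PySem.Dict.contains_eq_isSome_get?, hB]; simp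
        · simp [hnR]
      rw [if_neg hc, hcondB]
      simp only [Bool.false_eq_true, if_false]
      exact ih dA dB q nxt hrel

lemma pvLevel (R : List String) (hR : R.Nodup) (conn : PySem.Dict String (List String))
    (Hconn : ∀ r ∈ R, (conn.get? r).isSome) (level : Int) (hlev : 0 ≤ level) :
    ∀ (f : List String) (fuelA : Nat) (dA dB : PySem.Dict String Int) (g : List String),
    pvRel R dA dB → (∀ r ∈ f, dA.get? r = some level) → (∀ r ∈ g, dA.get? r = some (level + 1)) →
    pvCnt R dA + f.length + g.length ≤ fuelA →
    ∃ fuelA' dA' dB' g',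
      pvBFSA conn fuelA dA (f ++ g) = pvBFSA conn fuelA' dA' g' ∧
      f.foldl (fun (st : PySem.Dict String Int × List String) r =>
          match conn.get? r with
          | none => st
          | some children =>
            children.foldl (fun (st : PySem.Dict String Int × List String) n =>
              if List.contains R n && !(st.1.contains n) then (st.1.insert n (level + 1), st.2 ++ [n]) else st) st)
        (dB, g) = (dB', g') ∧
      pvRel R dA' dB' ∧ (∀ r ∈ g', dA'.get? r = some (level + 1)) ∧
      pvCnt R dA' + g'.length = pvCnt R dA + g.length ∧
      fuelA' + f.length = fuelA := by
  intro f
  induction f with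
  | nil =>
    intro fuelA dA dB g hrel hf hg hfuel
    exact ⟨fuelA, dA, dB, g, rfl, rfl, hrel, hg, rfl, by simp⟩
  | cons r f' ih =>
    intro fuelA dA dB g hrel hf hg hfuel
    have hrlvl : dA.get? r = some level := hf r List.mem_cons_self
    have hrR : r ∈ R := by
      by_contra hn
      rw [((hrel r).2 hn).1] at hrlvl; cases hrlvl
    obtain ⟨cs, hcs⟩ := Option.isSome_iff_exists.mp (Hconn r hrR)
    obtain ⟨fa, rfl⟩ : ∃ fa, fuelA = fa + 1 := ⟨fuelA - 1, by simp at hfuel; omega⟩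
    obtain ⟨dA1, dB1, new, hA, hB, hrel1, hpres, hnew, hcnt⟩ :=
      pvExpand R hR (level + 1) (by omega) cs dA dB (f' ++ g) g hrel
    have stepA : pvBFSA conn (fa + 1) dA ((r :: f') ++ g) = pvBFSA conn fa dA1 (f' ++ (g ++ new)) := by
      rw [show ((r :: f') ++ g) = r :: (f' ++ g) from rfl]
      rw [pvBFSA_cons conn fa dA r (f' ++ g) cs hcs]
      rw [PySem.Dict.getD_of_get?_eq_some _ 0 hrlvl]
      rw [hA]
      simp [List.append_assoc]
    have hf' : ∀ x ∈ f', dA1.get? x = some level :=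
      fun x hx => hpres x level hlev (hf x (List.mem_cons_of_mem _ hx))
    have hg' : ∀ x ∈ g ++ new, dA1.get? x = some (level + 1) := by
      intro x hx
      rcases List.mem_append.mp hx with h | h
      · exact hpres x (level + 1) (by omega) (hg x h)
      · exact hnew x h
    have hfuel' : pvCnt R dA1 + f'.length + (g ++ new).length ≤ fa := by
      simp only [List.length_cons, List.length_append] at hfuel ⊢
      omega
    obtain ⟨fuelA', dA', dB', g', e1, e2, hrel', hg'', hcnt', hfe⟩ :=
      ih fa dA1 dB1 (g ++ new) hrel1 hf' hg' hfuel'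
    refine ⟨fuelA', dA', dB', g', ?_, ?_, hrel', hg'', ?_, ?_⟩
    · rw [stepA]; exact e1
    · simp only [List.foldl_cons, hcs]
      rw [hB]
      exact e2
    · simp only [List.length_append] at hcnt' ⊢
      omega
    · simp only [List.length_cons]
      omega

lemma pvOuter (R : List String) (hR : R.Nodup) (conn : PySem.Dict String (List String))
    (Hconn : ∀ r ∈ R, (conn.get? r).isSome) :
    ∀ (fuelB fuelA : Nat) (L : List String) (level : Int) (dA dB : PySem.Dict String Int),
    0 ≤ level → pvRel R dA dB → (∀ r ∈ L, dA.get? r = some level) →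
    pvCnt R dA + L.length ≤ fuelA → pvCnt R dA + 1 ≤ fuelB →
    pvRel R (pvBFSA conn fuelA dA L) (pvLevelB R conn fuelB dB L level) := by
  intro fuelB
  induction fuelB with
  | zero =>
    intro fuelA L level dA dB hlev hrel hL hfa hfb
    exact absurd hfb (by omega)
  | succ fB ih =>
    intro fuelA L level dA dB hlev hrel hL hfa hfb
    cases L with
    | nil => rw [pvBFSA_nil, pvLevelB_nil]; exact hrel
    | cons r0 fr =>
      obtain ⟨fuelA', dA', dB', g', e1, e2, hrel', hg', hcnt, hfe⟩ :=
        pvLevel R hR conn Hconn level hlev (r0 :: fr) fuelA dA dB [] hrel hL (by simp)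
          (by simpa using hfa)
      rw [List.append_nil] at e1
      rw [pvLevelB_cons, e2, e1]
      cases g' with
      | nil =>
        rw [pvBFSA_nil, pvLevelB_nil]
        exact hrel'
      | cons x xs =>
        apply ih fuelA' (x :: xs) (level + 1) dA' dB' (by omega) hrel' hg'
        · simp only [List.length_nil, List.length_cons] at hcnt hfa hfe ⊢
          omega
        · simp only [List.length_nil, List.length_cons] at hcnt ⊢
          omega

lemma pvFoldInsert_get? (l : List String) (v : Int) :
    ∀ (d : PySem.Dict String Int) (r : String),
      (l.foldl (fun d room => d.insert room v) d).get? r = if r ∈ l then some v else d.get? r := by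
  induction l with
  | nil => simp
  | cons a t ih =>
    intro d r
    simp only [List.foldl_cons]
    rw [ih]
    by_cases h : r ∈ t <;> by_cases h2 : r = a <;>
      simp [h, h2, PySem.Dict.get?_insert]

lemma pvInit_get? (all : List String) (s r : String) :
    ((pvStepsInit all).insert s 0).get? r =
      if r = s then some 0 else if r ∈ all then some (-1) else none := by
  rw [PySem.Dict.get?_insert]
  unfold pvStepsInit
  rw [pvFoldInsert_get?]
  by_cases h : r = s <;> by_cases h2 : r ∈ all <;> simp [h, h2, PySem.Dict.get?_empty]

lemma pvInitRel (all : List String) (s : String) (hs : s ∈ all) :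
    pvRel (PySem.Set.ofList all) ((pvStepsInit all).insert s 0) (PySem.Dict.empty.insert s 0) := by
  intro r
  constructor
  · intro hrR
    have hr : r ∈ all := (PySem.Set.mem_ofList all r).mp hrR
    by_cases h : r = s
    · right
      refine ⟨0, le_refl 0, ?_, ?_⟩
      · rw [pvInit_get?]; simp [h]
      · rw [PySem.Dict.get?_insert]; simp [h]
    · left
      refine ⟨?_, ?_⟩
      · rw [pvInit_get?]; simp [h, hr]
      · rw [PySem.Dict.get?_insert]; simp [h, PySem.Dict.get?_empty]
  · intro hrR
    have hr : r ∉ all := fun c => hrR ((PySem.Set.mem_ofList all r).mpr c)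
    have hrs : r ≠ s := fun c => hr (c ▸ hs)
    refine ⟨?_, ?_⟩
    · rw [pvInit_get?]; simp [hrs, hr]
    · rw [PySem.Dict.get?_insert]; simp [hrs, PySem.Dict.get?_empty]

lemma pvOfList_isSome (l : List (String × List String)) (r : String) (h : r ∈ l.map Prod.fst) :
    ((PySem.Dict.ofList l).get? r).isSome := by
  have main : ∀ (l : List (String × List String)) (d : PySem.Dict String (List String)) (r : String),
      r ∈ l.map Prod.fst ∨ ((d.get? r).isSome = true) →
      (((l.foldl (fun acc p => acc.insert p.1 p.2) d).get? r).isSome = true) := by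
    intro l
    induction l with
    | nil =>
      intro d r h
      rcases h with h | h
      · simp at h
      · simpa using h
    | cons a t ih =>
      intro d r h
      simp only [List.foldl_cons]
      apply ih
      by_cases h2 : r = a.1
      · right; rw [PySem.Dict.get?_insert]; simp [h2]
      · rcases h with h | h
        · rcases List.mem_map.mp h with ⟨p, hp, hfst⟩
          rcases List.mem_cons.mp hp with hpa | hpt
          · exact absurd (hfst ▸ congrArg Prod.fst hpa.symm).symm h2
          · exact Or.inl (List.mem_map.mpr ⟨p, hpt, hfst⟩)
        · right; rw [PySem.Dict.get?_insert]; simpa [h2] using h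
  simpa [PySem.Dict.ofList, PySem.Dict.update] using main l PySem.Dict.empty r (Or.inl h)

lemma pvCnt_le (R : List String) (d : PySem.Dict String Int) : pvCnt R d ≤ R.length :=
  List.length_filter_le _ _

lemma pvMain (all_room_names : List String) (connections : List (String × List String))
    (Hkeys : ∀ r ∈ all_room_names, r ∈ connections.map Prod.fst)
    (s : String) (hs : s ∈ all_room_names) (room : String) (hroom : room ∈ all_room_names) :
    ∃ w : Int,
      (pvBFSA (PySem.Dict.ofList connections) (all_room_names.length + 1)
          ((pvStepsInit all_room_names).insert s 0) [s]).getD room 0 = w ∧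
      (pvLevelB (PySem.Set.ofList all_room_names) (PySem.Dict.ofList connections)
          (all_room_names.length + 1) (PySem.Dict.empty.insert s 0) [s] 0).getD room (-1) = w := by
  have hR := PySem.Set.nodup_ofList all_room_names
  have Hconn : ∀ r ∈ PySem.Set.ofList all_room_names,
      ((PySem.Dict.ofList connections).get? r).isSome := fun r hr =>
    pvOfList_isSome connections r (Hkeys r ((PySem.Set.mem_ofList all_room_names r).mp hr))
  have hL : ∀ r ∈ [s], ((pvStepsInit all_room_names).insert s 0).get? r = some 0 := by
    intro r hr
    rw [List.mem_singleton] at hr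
    subst hr
    rw [pvInit_get?]
    simp
  have hcntle := pvCnt_le (PySem.Set.ofList all_room_names) ((pvStepsInit all_room_names).insert s 0)
  have hlenle := PySem.Set.length_ofList_le all_room_names
  have hrelF := pvOuter (PySem.Set.ofList all_room_names) hR (PySem.Dict.ofList connections) Hconn
    (all_room_names.length + 1) (all_room_names.length + 1) [s] 0
    ((pvStepsInit all_room_names).insert s 0) (PySem.Dict.empty.insert s 0)
    (le_refl 0) (pvInitRel all_room_names s hs) hL
    (by simp only [List.length_cons, List.length_nil]; omega) (by omega)
  rcases (hrelF room).1 ((PySem.Set.mem_ofList all_room_names room).mpr hroom) with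
    ⟨h1, h2⟩ | ⟨v, hv, h1, h2⟩
  · exact ⟨-1, by rw [PySem.Dict.getD_of_get?_eq_some _ 0 h1], by rw [PySem.Dict.getD_of_get?_eq_none _ _ h2]⟩
  · exact ⟨v, by rw [PySem.Dict.getD_of_get?_eq_some _ 0 h1], by rw [PySem.Dict.getD_of_get?_eq_some _ _ h2]⟩


-- ================= level BFS computes the distances =================

-- invariant of one level expansion: d0 = dict at level start, lvl = value being written,
-- Tgt = the vertices that must end up newly discovered, st = (dict, new frontier) so far.
def pvSt (all : List String) (lvl : Int) (d0 : PySem.Dict String Int) (Tgt : String → Prop)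
    (st : PySem.Dict String Int × List String) : Prop :=
  (∀ x, st.1.get? x = if x ∈ st.2 then some lvl else d0.get? x) ∧
  st.2.Nodup ∧
  (∀ x ∈ st.2, x ∈ all ∧ d0.contains x = false ∧ Tgt x) ∧
  (∀ x, x ∈ all → d0.contains x = false → Tgt x → x ∈ st.2)

lemma pvSt_congr {all : List String} {lvl : Int}
    {d0 : PySem.Dict String Int} {Tgt Tgt' : String → Prop}
    {st : PySem.Dict String Int × List String}
    (h : pvSt all lvl d0 Tgt st) (hiff : ∀ x, Tgt x ↔ Tgt' x) :
    pvSt all lvl d0 Tgt' st :=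
  ⟨h.1, h.2.1, fun x hx => ⟨(h.2.2.1 x hx).1, (h.2.2.1 x hx).2.1, (hiff x).mp (h.2.2.1 x hx).2.2⟩,
   fun x h1 h2 h3 => h.2.2.2 x h1 h2 ((hiff x).mpr h3)⟩

lemma pvContains_of_pvSt {all : List String} {lvl : Int}
    {d0 : PySem.Dict String Int} {Tgt : String → Prop} {st : PySem.Dict String Int × List String}
    (h : pvSt all lvl d0 Tgt st) (x : String) :
    st.1.contains x = (decide (x ∈ st.2) || d0.contains x) := by
  rw [PySem.Dict.contains_eq_isSome_get?, h.1 x]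
  by_cases hx : x ∈ st.2
  · simp [hx]
  · simp [hx, PySem.Dict.contains_eq_isSome_get?]

lemma pvChildStep {all : List String} {lvl : Int}
    {d0 : PySem.Dict String Int} {Tgt : String → Prop} {st : PySem.Dict String Int × List String}
    (h : pvSt all lvl d0 Tgt st) (n : String) :
    pvSt all lvl d0 (fun x => Tgt x ∨ (x = n ∧ n ∈ all))
      (if List.contains (PySem.Set.ofList all) n && !(st.1.contains n)
        then (st.1.insert n lvl, st.2 ++ [n]) else st) := by
  obtain ⟨hC1, hnd, hC2, hC3⟩ := h
  have hmem : ∀ y : String, (List.contains (PySem.Set.ofList all) y = true) ↔ y ∈ all := by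
    intro y
    rw [List.contains_iff_mem, PySem.Set.mem_ofList]
  by_cases hg : (List.contains (PySem.Set.ofList all) n && !(st.1.contains n)) = true
  · rw [if_pos hg]
    obtain ⟨hin, hnc⟩ := Bool.and_eq_true_iff.mp hg
    have hnall : n ∈ all := (hmem n).mp hin
    have hcontains : st.1.contains n = false := by
      cases hcn : st.1.contains n
      · rfl
      · rw [hcn] at hnc; cases hnc
    have hnacc : n ∉ st.2 := by
      intro hn
      rw [pvContains_of_pvSt (Tgt := Tgt) ⟨hC1, hnd, hC2, hC3⟩ n] at hcontains
      simp [hn] at hcontains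
    have hfresh : d0.contains n = false := by
      rw [pvContains_of_pvSt (Tgt := Tgt) ⟨hC1, hnd, hC2, hC3⟩ n] at hcontains
      simp [hnacc] at hcontains
      exact hcontains
    refine ⟨?_, ?_, ?_, ?_⟩
    · intro x
      by_cases hx : x = n
      · subst hx
        rw [PySem.Dict.get?_insert_self]
        simp
      · rw [PySem.Dict.get?_insert_of_ne _ _ hx, hC1 x]
        simp only [List.mem_append, List.mem_singleton, hx, or_false]
    · rw [List.nodup_append]
      refine ⟨hnd, List.nodup_singleton n, ?_⟩
      simp only [List.mem_cons, List.not_mem_nil, or_false, ne_eq, forall_eq]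
      intro a ha hc
      exact hnacc (hc ▸ ha)
    · intro x hx
      rcases List.mem_append.mp hx with hx | hx
      · obtain ⟨h1, h2, h3⟩ := hC2 x hx
        exact ⟨h1, h2, Or.inl h3⟩
      · rw [List.mem_singleton] at hx
        subst hx
        exact ⟨hnall, hfresh, Or.inr ⟨rfl, hnall⟩⟩
    · intro x h1 h2 h3
      rcases h3 with h3 | ⟨h3, _⟩
      · exact List.mem_append.mpr (Or.inl (hC3 x h1 h2 h3))
      · subst h3
        exact List.mem_append.mpr (Or.inr (List.mem_singleton.mpr rfl))
  · rw [if_neg hg]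
    refine ⟨hC1, hnd, ?_, ?_⟩
    · intro x hx
      obtain ⟨h1, h2, h3⟩ := hC2 x hx
      exact ⟨h1, h2, Or.inl h3⟩
    · intro x h1 h2 h3
      rcases h3 with h3 | ⟨h3, _⟩
      · exact hC3 x h1 h2 h3
      · subst h3
        have hcn : st.1.contains x = true := by
          by_contra hc
          rw [Bool.not_eq_true] at hc
          exact hg (by rw [hc, (hmem x).mpr h1]; rfl)
        rw [pvContains_of_pvSt (Tgt := Tgt) ⟨hC1, hnd, hC2, hC3⟩ x, h2] at hcn
        simpa using hcn


lemma pvChildrenFold {all : List String} {lvl : Int} {d0 : PySem.Dict String Int} :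
    ∀ (cs : List String) (Tgt : String → Prop) (st : PySem.Dict String Int × List String),
      pvSt all lvl d0 Tgt st →
      pvSt all lvl d0 (fun x => Tgt x ∨ (x ∈ cs ∧ x ∈ all))
        (cs.foldl (fun (st : PySem.Dict String Int × List String) n =>
          if List.contains (PySem.Set.ofList all) n && !(st.1.contains n)
            then (st.1.insert n lvl, st.2 ++ [n]) else st) st) := by
  intro cs
  induction cs with
  | nil =>
    intro Tgt st h
    simpa using pvSt_congr h (by simp)
  | cons c cs ih =>
    intro Tgt st h
    simp only [List.foldl_cons]
    have h1 := pvChildStep h c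
    have h2 := ih _ _ h1
    apply pvSt_congr h2
    intro x
    constructor
    · rintro ((h | ⟨rfl, h⟩) | ⟨h3, h4⟩)
      · exact Or.inl h
      · exact Or.inr ⟨List.mem_cons_self, h⟩
      · exact Or.inr ⟨List.mem_cons_of_mem _ h3, h4⟩
    · rintro (h | ⟨h3, h4⟩)
      · exact Or.inl (Or.inl h)
      · rcases List.mem_cons.mp h3 with rfl | h3
        · exact Or.inl (Or.inr ⟨rfl, h4⟩)
        · exact Or.inr ⟨h3, h4⟩

lemma pvFrontierFold {all : List String} {conn : PySem.Dict String (List String)} {lvl : Int}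
    {d0 : PySem.Dict String Int} :
    ∀ (f : List String) (Tgt : String → Prop) (st : PySem.Dict String Int × List String),
      pvSt all lvl d0 Tgt st →
      pvSt all lvl d0 (fun x => Tgt x ∨ ∃ u ∈ f, pvE conn all u x)
        (f.foldl (fun (st : PySem.Dict String Int × List String) r =>
          match conn.get? r with
          | none => st
          | some children =>
            children.foldl (fun (st : PySem.Dict String Int × List String) n =>
              if List.contains (PySem.Set.ofList all) n && !(st.1.contains n)
                then (st.1.insert n lvl, st.2 ++ [n]) else st) st) st) := by
  intro f
  induction f with
  | nil =>
    intro Tgt st h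
    simpa using pvSt_congr h (by simp)
  | cons u f ih =>
    intro Tgt st h
    simp only [List.foldl_cons]
    have hstep : pvSt all lvl d0 (fun x => Tgt x ∨ pvE conn all u x)
        (match conn.get? u with
         | none => st
         | some children =>
           children.foldl (fun (st : PySem.Dict String Int × List String) n =>
             if List.contains (PySem.Set.ofList all) n && !(st.1.contains n)
               then (st.1.insert n lvl, st.2 ++ [n]) else st) st) := by
      cases hget : conn.get? u with
      | none =>
        apply pvSt_congr h
        intro x
        constructor
        · exact Or.inl
        · rintro (h | ⟨hmem, _⟩)
          · exact h
          · rw [PySem.Dict.getD_eq_get?_getD, hget] at hmem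
            cases hmem
      | some cs =>
        have hcs : conn.getD u [] = cs := by rw [PySem.Dict.getD_eq_get?_getD, hget]; rfl
        apply pvSt_congr (pvChildrenFold cs Tgt st h)
        intro x
        simp only [pvE, hcs]
    have := ih _ _ hstep
    apply pvSt_congr this
    intro x
    simp only [List.mem_cons]
    constructor
    · rintro ((h | h) | ⟨u', hu', he⟩)
      · exact Or.inl h
      · exact Or.inr ⟨u, Or.inl rfl, h⟩
      · exact Or.inr ⟨u', Or.inr hu', he⟩
    · rintro (h | ⟨u', hu' | hu', he⟩)
      · exact Or.inl (Or.inl h)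
      · exact Or.inl (Or.inr (hu' ▸ he))
      · exact Or.inr ⟨u', hu', he⟩

-- the level-BFS loop invariant at level k: visited dict d, frontier f
def pvInv (all : List String) (conn : PySem.Dict String (List String)) (s : String)
    (k : Nat) (d : PySem.Dict String Int) (f : List String) : Prop :=
  (∀ x (v : Int), d.get? x = some v → ∃ n : Nat, v = (n : Int) ∧ n ≤ k ∧ pvMinD (pvE conn all) s x n) ∧
  (∀ x (n : Nat), pvMinD (pvE conn all) s x n → n ≤ k → d.get? x = some (n : Int)) ∧
  (∀ x, x ∈ f ↔ pvMinD (pvE conn all) s x k) ∧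
  f.Nodup ∧ (∀ x ∈ f, x ∈ all)

lemma pvHPL_zero_eq {E : String → String → Prop} {s x : String} (h : pvHPL E s x 0) : x = s := by
  rcases h with ⟨_, h⟩ | ⟨ws, _, hl⟩
  · exact h
  · omega

lemma pvInvNext {all : List String} {conn : PySem.Dict String (List String)} {s : String}
    {k : Nat} {d : PySem.Dict String Int} {f : List String}
    {st : PySem.Dict String Int × List String}
    (hInv : pvInv all conn s k d f)
    (hSt : pvSt all ((k : Int) + 1) d (fun x => ∃ u ∈ f, pvE conn all u x) st) :
    pvInv all conn s (k + 1) st.1 st.2 := by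
  obtain ⟨hI1, hI2, hI3, hI4, hI5⟩ := hInv
  refine ⟨?_, ?_, ?_, hSt.2.1, fun x hx => (hSt.2.2.1 x hx).1⟩
  · -- forward characterization
    intro x v hx
    rw [hSt.1 x] at hx
    by_cases hmem : x ∈ st.2
    · rw [if_pos hmem] at hx
      injection hx with hx
      subst hx
      obtain ⟨hxall, hfresh, u, huf, hE⟩ := hSt.2.2.1 x hmem
      have hu : pvMinD (pvE conn all) s u k := (hI3 u).mp huf
      have hHPL : pvHPL (pvE conn all) s x (k + 1) := pvHPL_step hu.1 hE
      refine ⟨k + 1, by push_cast; ring, le_refl _, hHPL, ?_⟩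
      intro m hm
      obtain ⟨m', hm'le, hm'⟩ := pvExistsMinD m hm
      by_contra hlt
      have hle : m' ≤ k := by omega
      have := hI2 x m' hm' hle
      rw [PySem.Dict.contains_eq_isSome_get?, this] at hfresh
      cases hfresh
    · rw [if_neg hmem] at hx
      obtain ⟨n, hn1, hn2, hn3⟩ := hI1 x v hx
      exact ⟨n, hn1, by omega, hn3⟩
  · -- reverse characterization
    intro x n hmin hle
    rw [hSt.1 x]
    by_cases hnk : n ≤ k
    · have hd := hI2 x n hmin hnk
      have hnmem : x ∉ st.2 := by
        intro hmem
        have hfresh := (hSt.2.2.1 x hmem).2.1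
        rw [PySem.Dict.contains_eq_isSome_get?, hd] at hfresh
        cases hfresh
      rw [if_neg hnmem]
      exact hd
    · have hn : n = k + 1 := by omega
      subst hn
      obtain ⟨u, hE, humin⟩ := pvMinD_pred hmin
      have huf : u ∈ f := (hI3 u).mpr humin
      have hxall : x ∈ all := hE.2
      have hfresh : d.contains x = false := by
        cases hc : d.contains x
        · rfl
        · exfalso
          rw [PySem.Dict.contains_eq_isSome_get?] at hc
          obtain ⟨v, hv⟩ := Option.isSome_iff_exists.mp hc
          obtain ⟨n', hn'1, hn'2, hn'3⟩ := hI1 x v hv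
          have := pvMinD_unique hn'3 hmin
          omega
      have hmem : x ∈ st.2 := hSt.2.2.2 x hxall hfresh ⟨u, huf, hE⟩
      rw [if_pos hmem]
      push_cast
      ring_nf
  · -- frontier characterization
    intro x
    constructor
    · intro hmem
      obtain ⟨hxall, hfresh, u, huf, hE⟩ := hSt.2.2.1 x hmem
      have hu : pvMinD (pvE conn all) s u k := (hI3 u).mp huf
      have hHPL : pvHPL (pvE conn all) s x (k + 1) := pvHPL_step hu.1 hE
      refine ⟨hHPL, ?_⟩
      intro m hm
      obtain ⟨m', hm'le, hm'⟩ := pvExistsMinD m hm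
      by_contra hlt
      have hle2 : m' ≤ k := by omega
      have := hI2 x m' hm' hle2
      rw [PySem.Dict.contains_eq_isSome_get?, this] at hfresh
      cases hfresh
    · intro hmin
      obtain ⟨u, hE, humin⟩ := pvMinD_pred hmin
      have hfresh : d.contains x = false := by
        cases hc : d.contains x
        · rfl
        · exfalso
          rw [PySem.Dict.contains_eq_isSome_get?] at hc
          obtain ⟨v, hv⟩ := Option.isSome_iff_exists.mp hc
          obtain ⟨n', hn'1, hn'2, hn'3⟩ := hI1 x v hv
          have := pvMinD_unique hn'3 hmin
          omega
      exact hSt.2.2.2 x hE.2 hfresh ⟨u, (hI3 u).mpr humin, hE⟩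

-- when the frontier is empty at level k, d answers every room
lemma pvFinalLevel {all : List String} {conn : PySem.Dict String (List String)} {s : String}
    {k : Nat} {d : PySem.Dict String Int}
    (hInv : pvInv all conn s k d []) (x : String) :
    pvAns (pvE conn all) s x (d.getD x (-1)) := by
  obtain ⟨hI1, hI2, hI3, _, _⟩ := hInv
  have hno : ∀ j x, ¬ pvMinD (pvE conn all) s x (k + j) := by
    intro j
    induction j with
    | zero => intro x h; exact absurd h (by simpa using (not_iff_not.mpr (hI3 x)).mp (by simp))
    | succ j ih =>
      intro x h
      have : k + (j + 1) = (k + j) + 1 := by omega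
      rw [this] at h
      obtain ⟨u, _, hu⟩ := pvMinD_pred h
      exact ih u hu
  cases hx : d.get? x with
  | some v =>
    rw [PySem.Dict.getD_of_get?_eq_some _ _ hx]
    obtain ⟨n, hn1, hn2, hn3⟩ := hI1 x v hx
    exact Or.inl ⟨n, hn1, hn3⟩
  | none =>
    rw [PySem.Dict.getD_of_get?_eq_none _ _ hx]
    refine Or.inr ⟨rfl, ?_⟩
    intro n hn
    obtain ⟨m, hmle, hm⟩ := pvExistsMinD n hn
    by_cases hmk : m ≤ k
    · have := hI2 x m hm hmk
      rw [this] at hx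
      cases hx
    · have : m = k + (m - k) := by omega
      rw [this] at hm
      exact hno (m - k) x hm

-- the fuel bookkeeping: newly discovered rooms shrink the undiscovered count
def pvCntB (all : List String) (d : PySem.Dict String Int) : Nat :=
  ((PySem.Set.ofList all).filter (fun r => !(d.contains r))).length

lemma pvCntB_drop {all : List String} :
    ∀ (acc : List String) (base after : PySem.Dict String Int),
      acc.Nodup → (∀ x ∈ acc, x ∈ all) → (∀ x ∈ acc, base.contains x = false) →
      (∀ x, after.contains x = (decide (x ∈ acc) || base.contains x)) →
      pvCntB all after + acc.length = pvCntB all base := by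
  intro acc
  induction acc with
  | nil =>
    intro base after _ _ _ hchar
    have : (fun r => !(after.contains r)) = (fun r => !(base.contains r)) := by
      funext r
      rw [hchar r]
      simp
    unfold pvCntB
    rw [this]
    simp
  | cons a t ih =>
    intro base after hnd hsub hfresh hchar
    obtain ⟨hat, hndt⟩ := List.nodup_cons.mp hnd
    -- intermediate dict: base with a added; realized via (base.insert a 0)
    have hmid : ∀ x, (base.insert a (0 : Int)).contains x = (decide (x = a) || base.contains x) := by
      intro x
      rw [PySem.Dict.contains_insert]
      by_cases hx : x = a <;> simp [hx]
    have ih' := ih (base.insert a 0) after hndt (fun x hx => hsub x (List.mem_cons_of_mem _ hx))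
      (by
        intro x hx
        rw [hmid x]
        have : x ≠ a := fun c => hat (c ▸ hx)
        simp [this, hfresh x (List.mem_cons_of_mem _ hx)])
      (by
        intro x
        rw [hchar x, hmid x]
        by_cases hx : x = a
        · simp [hx]
        · by_cases hxt : x ∈ t <;> simp [hx, hxt])
    have hflip : pvCntB all (base.insert a 0) + 1 = pvCntB all base := by
      unfold pvCntB
      apply pvFilter_flip (PySem.Set.nodup_ofList all)
        ((PySem.Set.mem_ofList all a).mpr (hsub a List.mem_cons_self))
      · show (!(base.contains a)) = true
        rw [hfresh a List.mem_cons_self]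
        rfl
      · show (!((base.insert a (0:Int)).contains a)) = false
        rw [hmid a]
        simp
      · intro x hx
        show (!(base.contains x)) = (!((base.insert a (0:Int)).contains x))
        rw [hmid x]
        simp [hx]
    simp only [List.length_cons]
    omega

-- main induction: with enough fuel, the level BFS answers every room
lemma pvLevelBCorrect {all : List String} {conn : PySem.Dict String (List String)} {s : String} :
    ∀ (fuel : Nat) (k : Nat) (d : PySem.Dict String Int) (f : List String),
      pvInv all conn s k d f →
      pvCntB all d + 1 ≤ fuel →
      ∀ x, pvAns (pvE conn all) s x
        ((pvLevelB (PySem.Set.ofList all) conn fuel d f (k : Int)).getD x (-1)) := by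
  intro fuel
  induction fuel with
  | zero =>
    intro k d f _ hfuel
    omega
  | succ fuel ih =>
    intro k d f hInv hfuel x
    cases f with
    | nil =>
      rw [pvLevelB_nil]
      exact pvFinalLevel hInv x
    | cons r0 fr =>
      rw [pvLevelB_cons]
      set st := ((r0 :: fr).foldl (fun (st : PySem.Dict String Int × List String) r =>
        match conn.get? r with
        | none => st
        | some children =>
          children.foldl (fun (st : PySem.Dict String Int × List String) n =>
            if List.contains (PySem.Set.ofList all) n && !(st.1.contains n)
              then (st.1.insert n ((k : Int) + 1), st.2 ++ [n]) else st) st) (d, [])) with hst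
      have hstart : pvSt all ((k : Int) + 1) d (fun _ => False) (d, []) :=
        ⟨by simp, List.nodup_nil, by simp, by simp⟩
      have hSt : pvSt all ((k : Int) + 1) d
          (fun x => ∃ u ∈ (r0 :: fr), pvE conn all u x) st := by
        rw [hst]
        exact pvSt_congr (pvFrontierFold (conn := conn) (r0 :: fr) _ _ hstart)
          (by intro x; simp)
      have hInv' := pvInvNext hInv hSt
      have hcnt : pvCntB all st.1 + st.2.length = pvCntB all d :=
        pvCntB_drop st.2 d st.1 hSt.2.1 (fun y hy => (hSt.2.2.1 y hy).1)
          (fun y hy => (hSt.2.2.1 y hy).2.1)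
          (fun y => pvContains_of_pvSt hSt y)
      have hcast : (k : Int) + 1 = ((k + 1 : Nat) : Int) := by push_cast; ring
      cases hg : st.2 with
      | nil =>
        rw [pvLevelB_nil]
        rw [hg] at hInv'
        exact pvFinalLevel hInv' x
      | cons g0 gr =>
        rw [hcast]
        rw [hg] at hInv' hcnt
        exact ih (k + 1) st.1 (g0 :: gr) hInv' (by simp at hcnt ⊢; omega) x

lemma pvInvInit {all : List String} {conn : PySem.Dict String (List String)} {s : String}
    (hs : s ∈ all) :
    pvInv all conn s 0 (PySem.Dict.empty.insert s 0) [s] := by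
  have hget : ∀ x, (PySem.Dict.empty.insert s (0 : Int)).get? x = if x = s then some 0 else none := by
    intro x
    rw [PySem.Dict.get?_insert]
    by_cases hx : x = s <;> simp [hx, PySem.Dict.get?_empty]
  have hmins : pvMinD (pvE conn all) s s 0 := ⟨pvHPL_zero s, fun m _ => Nat.zero_le m⟩
  refine ⟨?_, ?_, ?_, List.nodup_singleton s, by simpa using hs⟩
  · intro x v hx
    rw [hget x] at hx
    by_cases hxs : x = s
    · rw [if_pos hxs] at hx
      injection hx with hx
      subst hxs
      exact ⟨0, by omega, le_refl 0, hmins⟩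
    · rw [if_neg hxs] at hx
      cases hx
  · intro x n hmin hle
    have hn : n = 0 := by omega
    subst hn
    have hx : x = s := pvHPL_zero_eq hmin.1
    subst hx
    rw [hget]
    simp
  · intro x
    rw [List.mem_singleton]
    constructor
    · rintro rfl; exact hmins
    · intro h; exact pvHPL_zero_eq h.1


-- ================= Floyd–Warshall computes the distances =================

-- the pointwise effect of one relaxation of cell (i,j) through k
def pvComb (dij dik dkj : Option Int) : Option Int :=
  match dik, dkj with
  | some a, some b =>
    match dij with
    | none => some (a + b)
    | some c => if a + b < c then some (a + b) else some c
  | _, _ => dij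

lemma pvComb_self_zero (x : Option Int) : pvComb x x (some 0) = x := by
  cases x with
  | none => rfl
  | some a => simp [pvComb]

lemma pvComb_idem (c p q : Option Int) : pvComb (pvComb c p q) p q = pvComb c p q := by
  cases p with
  | none => rfl
  | some a =>
    cases q with
    | none => rfl
    | some b =>
      cases c with
      | none => simp [pvComb]
      | some c0 =>
        simp only [pvComb]
        split_ifs <;> simp_all

-- ---- characterizations of the three initialization passes ----

lemma pvGridInner (i0 : String) :
    ∀ (js : List String) (d : PySem.Dict (String × String) (Option Int)) (x y : String),
      (js.foldl (fun d j => d.insert (i0, j) (none : Option Int)) d).get? (x, y) =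
        if x = i0 ∧ y ∈ js then some none else d.get? (x, y) := by
  intro js
  induction js with
  | nil => intro d x y; simp
  | cons j tl ih =>
    intro d x y
    simp only [List.foldl_cons]
    rw [ih]
    rw [PySem.Dict.get?_insert]
    by_cases hx : x = i0 <;> by_cases hyj : y = j <;> by_cases hyt : y ∈ tl <;>
      simp [hx, hyj, hyt, Prod.ext_iff]

lemma pvGrid0 (all : List String) :
    ∀ (is : List String) (d : PySem.Dict (String × String) (Option Int)) (x y : String),
      (is.foldl (fun d i => all.foldl
          (fun (d : PySem.Dict (String × String) (Option Int)) j => d.insert (i, j) none) d) d).get? (x, y) =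
        if x ∈ is ∧ y ∈ all then some none else d.get? (x, y) := by
  intro is
  induction is with
  | nil => intro d x y; simp
  | cons i tl ih =>
    intro d x y
    simp only [List.foldl_cons]
    rw [ih, pvGridInner]
    by_cases hx : x = i <;> by_cases hxt : x ∈ tl <;> by_cases hy : y ∈ all <;>
      simp [hx, hxt, hy]

lemma pvEdgeInner (i0 : String) :
    ∀ (ns : List String) (d : PySem.Dict (String × String) (Option Int)),
      (∀ p, (ns.foldl (fun d n => if d.contains (i0, n) then d.insert (i0, n) (some 1) else d) d).contains p
          = d.contains p) ∧
      (∀ x y, (ns.foldl (fun d n => if d.contains (i0, n) then d.insert (i0, n) (some 1) else d) d).get? (x, y)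
          = if x = i0 ∧ y ∈ ns ∧ d.contains (i0, y) then some (some 1) else d.get? (x, y)) := by
  intro ns
  induction ns with
  | nil => intro d; exact ⟨fun p => rfl, fun x y => by simp⟩
  | cons n tl ih =>
    intro d
    simp only [List.foldl_cons]
    set d' := if d.contains (i0, n) then d.insert (i0, n) (some (1:Int)) else d with hd'
    have hcont : ∀ p, d'.contains p = d.contains p := by
      intro p
      rw [hd']
      split_ifs with hc
      · rw [PySem.Dict.contains_insert]
        by_cases hp : p = (i0, n)
        · simp [hp, hc]
        · have : (p == (i0, n)) = false := by simpa using hp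
          simp [this]
      · rfl
    have hget : ∀ x y, d'.get? (x, y) =
        if x = i0 ∧ y = n ∧ d.contains (i0, n) then some (some 1) else d.get? (x, y) := by
      intro x y
      rw [hd']
      by_cases hc : d.contains (i0, n) = true
      · rw [if_pos hc, PySem.Dict.get?_insert]
        by_cases hp : (x, y) = (i0, n)
        · rw [if_pos hp, if_pos ⟨congrArg Prod.fst hp, congrArg Prod.snd hp, hc⟩]
        · rw [if_neg hp, if_neg (fun hh : _ ∧ _ ∧ _ => hp (by rw [hh.1, hh.2.1]))]
      · rw [if_neg hc, if_neg (fun hh : _ ∧ _ ∧ _ => hc hh.2.2)]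
    obtain ⟨ihc, ihg⟩ := ih d'
    constructor
    · intro p
      rw [ihc, hcont]
    · intro x y
      rw [ihg, hcont, hget]
      by_cases hx : x = i0 <;> by_cases hyn : y = n <;> by_cases hyt : y ∈ tl <;>
        by_cases hcy : d.contains (i0, y) = true <;>
        simp_all [List.mem_cons]

lemma pvEdgePass (conn : PySem.Dict String (List String)) :
    ∀ (is : List String) (d : PySem.Dict (String × String) (Option Int)),
      (∀ p, (is.foldl (fun d i => (conn.getD i []).foldl
            (fun (d : PySem.Dict (String × String) (Option Int)) n =>
              if d.contains (i, n) then d.insert (i, n) (some 1) else d) d) d).contains p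
          = d.contains p) ∧
      (∀ x y, (is.foldl (fun d i => (conn.getD i []).foldl
            (fun (d : PySem.Dict (String × String) (Option Int)) n =>
              if d.contains (i, n) then d.insert (i, n) (some 1) else d) d) d).get? (x, y)
          = if x ∈ is ∧ y ∈ conn.getD x [] ∧ d.contains (x, y) then some (some 1) else d.get? (x, y)) := by
  intro is
  induction is with
  | nil => intro d; exact ⟨fun p => rfl, fun x y => by simp⟩
  | cons i tl ih =>
    intro d
    simp only [List.foldl_cons]
    obtain ⟨hc1, hg1⟩ := pvEdgeInner i (conn.getD i []) d
    obtain ⟨ihc, ihg⟩ := ih ((conn.getD i []).foldl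
      (fun (d : PySem.Dict (String × String) (Option Int)) n =>
        if d.contains (i, n) then d.insert (i, n) (some 1) else d) d)
    constructor
    · intro p
      rw [ihc, hc1]
    · intro x y
      rw [ihg, hg1, hc1]
      by_cases hx : x = i <;> by_cases hxt : x ∈ tl <;> by_cases hy : y ∈ conn.getD x [] <;>
        by_cases hcy : d.contains (x, y) = true <;>
        simp_all [List.mem_cons]

lemma pvDiagPass :
    ∀ (is : List String) (d : PySem.Dict (String × String) (Option Int)) (x y : String),
      (is.foldl (fun (d : PySem.Dict (String × String) (Option Int)) i =>
          d.insert (i, i) (some 0)) d).get? (x, y) =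
        if x = y ∧ x ∈ is then some (some 0) else d.get? (x, y) := by
  intro is
  induction is with
  | nil => intro d x y; simp
  | cons i tl ih =>
    intro d x y
    simp only [List.foldl_cons]
    rw [ih, PySem.Dict.get?_insert]
    by_cases hxy : x = y <;> by_cases hxi : x = i <;> by_cases hxt : x ∈ tl <;>
      simp_all [Prod.ext_iff] <;> (intro h; exact absurd h.symm hxy)


-- ---- the FW invariant: after processing intermediates K, each cell holds the K-restricted distance ----

def pvPIn (E : String → String → Prop) (K : List String) (i j : String) (n : Nat) : Prop :=
  ∃ ws, pvIsPath E i ws j ∧ ws.length + 1 = n ∧ ∀ w ∈ ws, w ∈ K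

def pvGoodC (E : String → String → Prop) (K : List String) (i j : String) (c : Option Int) : Prop :=
  (i = j ∧ c = some 0) ∨
  (i ≠ j ∧
    ((∀ v : Int, c = some v ↔ ∃ n : Nat, v = (n : Int) ∧ pvPIn E K i j n ∧ ∀ m, pvPIn E K i j m → n ≤ m) ∧
     (c = none ↔ ∀ n, ¬ pvPIn E K i j n)))

def pvGood (E : String → String → Prop) (all K : List String)
    (d : PySem.Dict (String × String) (Option Int)) : Prop :=
  ∀ i ∈ all, ∀ j ∈ all, ∃ c, d.get? (i, j) = some c ∧ pvGoodC E K i j c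

lemma pvGoodC_nonneg {E : String → String → Prop} {K : List String} {i j : String} {c : Option Int}
    (h : pvGoodC E K i j c) {v : Int} (hv : c = some v) : 0 ≤ v := by
  rcases h with ⟨_, hc⟩ | ⟨_, hiff, _⟩
  · rw [hc] at hv; injection hv with hv; omega
  · obtain ⟨n, hn, _, _⟩ := (hiff v).mp hv
    omega

lemma pvPIn_nil_iff {E : String → String → Prop} {i j : String} {n : Nat} :
    pvPIn E [] i j n ↔ (n = 1 ∧ E i j) := by
  constructor
  · rintro ⟨ws, hp, hl, hmem⟩
    have hws : ws = [] := by
      cases ws with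
      | nil => rfl
      | cons a t => exact absurd (hmem a List.mem_cons_self) (List.not_mem_nil)
    subst hws
    exact ⟨by simpa using hl.symm, hp⟩
  · rintro ⟨hn, hE⟩
    exact ⟨[], hE, by simpa using hn.symm, by simp⟩

-- the matrix after the three initialization passes
lemma pvGoodInit (conn : PySem.Dict String (List String)) (all : List String) :
    pvGood (pvE conn all) all []
      (all.foldl (fun (d : PySem.Dict (String × String) (Option Int)) i => d.insert (i, i) (some 0))
        (all.foldl (fun d i => (conn.getD i []).foldl
            (fun (d : PySem.Dict (String × String) (Option Int)) n =>
              if d.contains (i, n) then d.insert (i, n) (some 1) else d) d)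
          (all.foldl (fun d i => all.foldl
              (fun (d : PySem.Dict (String × String) (Option Int)) j => d.insert (i, j) none) d)
            PySem.Dict.empty))) := by
  intro i hi j hj
  have h0 : ∀ x y : String,
      (all.foldl (fun d i => all.foldl
          (fun (d : PySem.Dict (String × String) (Option Int)) j => d.insert (i, j) none) d)
        PySem.Dict.empty).get? (x, y) = if x ∈ all ∧ y ∈ all then some none else none := by
    intro x y
    rw [pvGrid0]
    by_cases h : x ∈ all ∧ y ∈ all <;> simp [h, PySem.Dict.get?_empty]
  have hcont0 : ∀ x y : String,
      (all.foldl (fun d i => all.foldl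
          (fun (d : PySem.Dict (String × String) (Option Int)) j => d.insert (i, j) none) d)
        PySem.Dict.empty).contains (x, y) = (decide (x ∈ all) && decide (y ∈ all)) := by
    intro x y
    rw [PySem.Dict.contains_eq_isSome_get?, h0]
    by_cases hx : x ∈ all <;> by_cases hy : y ∈ all <;> simp [hx, hy]
  obtain ⟨_, hg1⟩ := pvEdgePass conn all
    (all.foldl (fun d i => all.foldl
        (fun (d : PySem.Dict (String × String) (Option Int)) j => d.insert (i, j) none) d)
      PySem.Dict.empty)
  by_cases hij : i = j
  · subst hij
    refine ⟨some 0, ?_, Or.inl ⟨rfl, rfl⟩⟩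
    rw [pvDiagPass, if_pos ⟨rfl, hi⟩]
  · by_cases hedge : j ∈ conn.getD i []
    · refine ⟨some 1, ?_, Or.inr ⟨hij, ?_, ?_⟩⟩
      · rw [pvDiagPass, if_neg (fun h => hij h.1), hg1, hcont0]
        rw [if_pos ⟨hi, hedge, by simp [hi, hj]⟩]
      · intro v
        constructor
        · intro hv
          injection hv with hv
          refine ⟨1, by omega, pvPIn_nil_iff.mpr ⟨rfl, hedge, hj⟩, ?_⟩
          intro m hm
          rw [pvPIn_nil_iff] at hm
          omega
        · rintro ⟨n, hn, hPIn, _⟩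
          rw [pvPIn_nil_iff] at hPIn
          rw [hn, hPIn.1]
          rfl
      · constructor
        · intro h; cases h
        · intro h
          exact absurd (pvPIn_nil_iff.mpr ⟨rfl, hedge, hj⟩) (h 1)
    · refine ⟨none, ?_, Or.inr ⟨hij, ?_, ?_⟩⟩
      · rw [pvDiagPass, if_neg (fun h => hij h.1), hg1, hcont0]
        rw [if_neg (fun h => hedge h.2.1), h0, if_pos ⟨hi, hj⟩]
      · intro v
        constructor
        · intro h; cases h
        · rintro ⟨n, hn, hPIn, _⟩
          rw [pvPIn_nil_iff] at hPIn
          exact absurd hPIn.2.1 hedge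
      · constructor
        · intro _ n hn
          rw [pvPIn_nil_iff] at hn
          exact hedge hn.2.1
        · intro _; rfl


lemma pvPIn_mono {E : String → String → Prop} {K : List String} {k : String} {i j : String} {n : Nat}
    (h : pvPIn E K i j n) : pvPIn E (K ++ [k]) i j n := by
  obtain ⟨ws, hp, hl, hmem⟩ := h
  exact ⟨ws, hp, hl, fun w hw => List.mem_append.mpr (Or.inl (hmem w hw))⟩

-- composing a K-path i→k with a K-path k→j gives a (K++[k])-path i→j
lemma pvPIn_compose {E : String → String → Prop} {K : List String} {k i j : String} {n1 n2 : Nat}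
    (h1 : pvPIn E K i k n1) (h2 : pvPIn E K k j n2) : pvPIn E (K ++ [k]) i j (n1 + n2) := by
  obtain ⟨ws1, hp1, hl1, hm1⟩ := h1
  obtain ⟨ws2, hp2, hl2, hm2⟩ := h2
  refine ⟨ws1 ++ k :: ws2, pvIsPath_append ws1 i k ws2 j hp1 hp2, by simp; omega, ?_⟩
  intro w hw
  rcases List.mem_append.mp hw with hw | hw
  · exact List.mem_append.mpr (Or.inl (hm1 w hw))
  · rcases List.mem_cons.mp hw with rfl | hw
    · exact List.mem_append.mpr (Or.inr (List.mem_singleton.mpr rfl))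
    · exact List.mem_append.mpr (Or.inl (hm2 w hw))

-- a (K++[k])-path either avoids k (a K-path) or splits into K-paths i→k and k→j
lemma pvPIn_split {E : String → String → Prop} {K : List String} {k i j : String} {m : Nat}
    (h : pvPIn E (K ++ [k]) i j m) :
    pvPIn E K i j m ∨
      ∃ m1 m2, m1 + m2 ≤ m ∧ pvPIn E K i k m1 ∧ pvPIn E K k j m2 := by
  obtain ⟨ws, hp, hl, hmem⟩ := h
  by_cases hk : k ∈ ws
  · right
    obtain ⟨ws1, ws2, hp1, hp2, hnk1, hnk2, hlen, hsub1, hsub2⟩ := pvSplitThrough hp hk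
    refine ⟨ws1.length + 1, ws2.length + 1, by omega, ⟨ws1, hp1, rfl, ?_⟩, ⟨ws2, hp2, rfl, ?_⟩⟩
    · intro w hw
      rcases List.mem_append.mp (hmem w (hsub1 w hw)) with h | h
      · exact h
      · exact absurd ((List.mem_singleton.mp h) ▸ hw) hnk1
    · intro w hw
      rcases List.mem_append.mp (hmem w (hsub2 w hw)) with h | h
      · exact h
      · exact absurd ((List.mem_singleton.mp h) ▸ hw) hnk2
  · left
    refine ⟨ws, hp, hl, ?_⟩
    intro w hw
    rcases List.mem_append.mp (hmem w hw) with h | h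
    · exact h
    · exact absurd ((List.mem_singleton.mp h) ▸ hw) hk

-- arithmetic facts about pvComb
lemma pvComb_le_dij {cik ckj : Option Int} {c v : Int}
    (h : pvComb (some c) cik ckj = some v) : v ≤ c := by
  cases cik with
  | none => injection h with h; omega
  | some a =>
    cases ckj with
    | none => injection h with h; omega
    | some b =>
      simp only [pvComb] at h
      split_ifs at h with hlt <;> injection h with h <;> omega

lemma pvComb_le_sum {cij : Option Int} {a b v : Int}
    (h : pvComb cij (some a) (some b) = some v) : v ≤ a + b := by
  cases cij with
  | none => injection h with h; omega
  | some c =>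
    simp only [pvComb] at h
    split_ifs at h with hlt <;> injection h with h <;> omega

lemma pvComb_none_cases {cij cik ckj : Option Int}
    (h : pvComb cij cik ckj = none) : cij = none ∧ (cik = none ∨ ckj = none) := by
  cases cik with
  | none => exact ⟨h, Or.inl rfl⟩
  | some a =>
    cases ckj with
    | none => exact ⟨h, Or.inr rfl⟩
    | some b =>
      exfalso
      cases cij with
      | none => simp [pvComb] at h
      | some c =>
        simp only [pvComb] at h
        split_ifs at h

lemma pvComb_eq_dij {cij cik ckj : Option Int}
    (h : cik = none ∨ ckj = none) : pvComb cij cik ckj = cij := by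
  rcases h with h | h
  · rw [h]; rfl
  · rw [h]; cases cik <;> rfl

-- the pointwise Floyd–Warshall step preserves the invariant
lemma pvGoodStep {E : String → String → Prop} {all K : List String} {k : String} (hk : k ∈ all)
    {d d' : PySem.Dict (String × String) (Option Int)}
    (hgood : pvGood E all K d)
    (hchar : ∀ i ∈ all, ∀ j ∈ all, d'.get? (i, j) =
      some (pvComb (d.getD (i, j) none) (d.getD (i, k) none) (d.getD (k, j) none))) :
    pvGood E all (K ++ [k]) d' := by
  intro i hi j hj
  obtain ⟨cij, hcijget, hcij⟩ := hgood i hi j hj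
  obtain ⟨cik, hcikget, hcik⟩ := hgood i hi k hk
  obtain ⟨ckj, hckjget, hckj⟩ := hgood k hk j hj
  have hdij : d.getD (i, j) none = cij := PySem.Dict.getD_of_get?_eq_some _ _ hcijget
  have hdik : d.getD (i, k) none = cik := PySem.Dict.getD_of_get?_eq_some _ _ hcikget
  have hdkj : d.getD (k, j) none = ckj := PySem.Dict.getD_of_get?_eq_some _ _ hckjget
  have hget : d'.get? (i, j) = some (pvComb cij cik ckj) := by
    rw [hchar i hi j hj, hdij, hdik, hdkj]
  refine ⟨pvComb cij cik ckj, hget, ?_⟩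
  by_cases hij : i = j
  · -- diagonal stays 0
    subst hij
    left
    refine ⟨rfl, ?_⟩
    have hcij0 : cij = some 0 := by
      rcases hcij with ⟨_, h⟩ | ⟨h, _⟩
      · exact h
      · exact absurd rfl h
    subst hcij0
    cases cik with
    | none => rfl
    | some a =>
      cases hckj2 : ckj with
      | none => rfl
      | some b =>
        have ha : 0 ≤ a := pvGoodC_nonneg hcik rfl
        have hb : 0 ≤ b := pvGoodC_nonneg hckj hckj2
        simp only [pvComb]
        rw [if_neg (by omega)]
  · -- off-diagonal: pvComb is the (K ++ [k])-restricted distance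
    obtain ⟨hijS, hijN⟩ := (hcij.resolve_left (fun h => hij h.1)).2
    have hIK : ∀ a : Int, cik = some a → ∀ m1, pvPIn E K i k m1 → a ≤ (m1 : Int) := by
      intro a ha m1 hm1
      rcases hcik with ⟨_, h0⟩ | ⟨_, hS, _⟩
      · rw [h0] at ha; injection ha with ha; omega
      · obtain ⟨n, hn, _, hmin⟩ := (hS a).mp ha
        have := hmin m1 hm1
        omega
    have hKJ : ∀ b : Int, ckj = some b → ∀ m2, pvPIn E K k j m2 → b ≤ (m2 : Int) := by
      intro b hb m2 hm2
      rcases hckj with ⟨_, h0⟩ | ⟨_, hS, _⟩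
      · rw [h0] at hb; injection hb with hb; omega
      · obtain ⟨n, hn, _, hmin⟩ := (hS b).mp hb
        have := hmin m2 hm2
        omega
    have hIKnone : cik = none → ∀ m1, ¬ pvPIn E K i k m1 := by
      intro h m1
      rcases hcik with ⟨_, h0⟩ | ⟨_, _, hN⟩
      · rw [h0] at h; cases h
      · exact (hN.mp h) m1
    have hKJnone : ckj = none → ∀ m2, ¬ pvPIn E K k j m2 := by
      intro h m2
      rcases hckj with ⟨_, h0⟩ | ⟨_, _, hN⟩
      · rw [h0] at h; cases h
      · exact (hN.mp h) m2
    have hIKex : ∀ a : Int, cik = some a → (i = k ∧ a = 0) ∨ ∃ n : Nat, a = (n : Int) ∧ pvPIn E K i k n := by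
      intro a ha
      rcases hcik with ⟨he, h0⟩ | ⟨_, hS, _⟩
      · rw [h0] at ha; injection ha with ha; exact Or.inl ⟨he, ha.symm⟩
      · obtain ⟨n, hn, hp, _⟩ := (hS a).mp ha
        exact Or.inr ⟨n, hn, hp⟩
    have hKJex : ∀ b : Int, ckj = some b → (k = j ∧ b = 0) ∨ ∃ n : Nat, b = (n : Int) ∧ pvPIn E K k j n := by
      intro b hb
      rcases hckj with ⟨he, h0⟩ | ⟨_, hS, _⟩
      · rw [h0] at hb; injection hb with hb; exact Or.inl ⟨he, hb.symm⟩
      · obtain ⟨n, hn, hp, _⟩ := (hS b).mp hb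
        exact Or.inr ⟨n, hn, hp⟩
    have hComp : ∀ a b : Int, cik = some a → ckj = some b →
        ∃ n : Nat, a + b = (n : Int) ∧ pvPIn E (K ++ [k]) i j n := by
      intro a b ha hb
      rcases hIKex a ha with ⟨hik, ha0⟩ | ⟨n1, hn1, hp1⟩
      · rcases hKJex b hb with ⟨hkj, _⟩ | ⟨n2, hn2, hp2⟩
        · exact absurd (hik.trans hkj) hij
        · subst hik
          exact ⟨n2, by omega, pvPIn_mono hp2⟩
      · rcases hKJex b hb with ⟨hkj, hb0⟩ | ⟨n2, hn2, hp2⟩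
        · subst hkj
          exact ⟨n1, by omega, pvPIn_mono hp1⟩
        · exact ⟨n1 + n2, by push_cast; omega, pvPIn_compose hp1 hp2⟩
    have hAch : ∀ v : Int, pvComb cij cik ckj = some v →
        ∃ n : Nat, v = (n : Int) ∧ pvPIn E (K ++ [k]) i j n := by
      intro v hv
      cases hcik2 : cik with
      | none =>
        rw [pvComb_eq_dij (Or.inl hcik2)] at hv
        obtain ⟨n, hn, hp, _⟩ := (hijS v).mp hv
        exact ⟨n, hn, pvPIn_mono hp⟩
      | some a =>
        cases hckj2 : ckj with
        | none =>
          rw [pvComb_eq_dij (Or.inr hckj2)] at hv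
          obtain ⟨n, hn, hp, _⟩ := (hijS v).mp hv
          exact ⟨n, hn, pvPIn_mono hp⟩
        | some b =>
          rw [hcik2, hckj2] at hv
          cases hcij2 : cij with
          | none =>
            rw [hcij2] at hv
            simp only [pvComb] at hv
            injection hv with hv
            obtain ⟨n, hn, hp⟩ := hComp a b hcik2 hckj2
            exact ⟨n, by omega, hp⟩
          | some c =>
            rw [hcij2] at hv
            simp only [pvComb] at hv
            split_ifs at hv with hlt
            · injection hv with hv
              obtain ⟨n, hn, hp⟩ := hComp a b hcik2 hckj2
              exact ⟨n, by omega, hp⟩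
            · injection hv with hv
              obtain ⟨n, hn, hp, _⟩ := (hijS c).mp hcij2
              exact ⟨n, by omega, pvPIn_mono hp⟩
    have hBound : ∀ v : Int, pvComb cij cik ckj = some v →
        ∀ m, pvPIn E (K ++ [k]) i j m → v ≤ (m : Int) := by
      intro v hv m hm
      rcases pvPIn_split hm with hK | ⟨m1, m2, hle, h1, h2⟩
      · cases hcij2 : cij with
        | none => exact absurd hK ((hijN.mp hcij2) m)
        | some c =>
          obtain ⟨n, hn, _, hmin⟩ := (hijS c).mp hcij2
          have h1 := hmin m hK
          have h2 : v ≤ c := pvComb_le_dij (hcij2 ▸ hv)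
          omega
      · cases hcik2 : cik with
        | none => exact absurd h1 ((hIKnone hcik2) m1)
        | some a =>
          cases hckj2 : ckj with
          | none => exact absurd h2 ((hKJnone hckj2) m2)
          | some b =>
            have hva : v ≤ a + b := pvComb_le_sum (hcik2 ▸ hckj2 ▸ hv)
            have ha := hIK a hcik2 m1 h1
            have hb := hKJ b hckj2 m2 h2
            have : (m1 : Int) + m2 ≤ m := by omega
            omega
    have hNone : pvComb cij cik ckj = none → ∀ n, ¬ pvPIn E (K ++ [k]) i j n := by
      intro hv n hn
      obtain ⟨hcij2, hor⟩ := pvComb_none_cases hv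
      rcases pvPIn_split hn with hK | ⟨m1, m2, _, h1, h2⟩
      · exact (hijN.mp hcij2) n hK
      · rcases hor with h | h
        · exact (hIKnone h) m1 h1
        · exact (hKJnone h) m2 h2
    right
    refine ⟨hij, ?_, ?_⟩
    · intro v
      constructor
      · intro hv
        obtain ⟨n, hn, hp⟩ := hAch v hv
        refine ⟨n, hn, hp, ?_⟩
        intro m hm
        have := hBound v hv m hm
        omega
      · rintro ⟨n, hvn, hPIn, hmin⟩
        cases hcomb : pvComb cij cik ckj with
        | none => exact absurd hPIn (hNone hcomb n)
        | some w =>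
          obtain ⟨n', hwn', hp'⟩ := hAch w hcomb
          have h1 := hmin n' hp'
          have h2 := hBound w hcomb n hPIn
          have : n' = n := by omega
          rw [hwn', this, hvn]
    · constructor
      · intro h; exact hNone h
      · intro h
        cases hcomb : pvComb cij cik ckj with
        | none => rfl
        | some w =>
          obtain ⟨n', _, hp'⟩ := hAch w hcomb
          exact absurd hp' (h n')


-- ---- one FW round realizes the pointwise pvComb update ----

lemma pvRowkChar {d : PySem.Dict (String × String) (Option Int)} {k : String} :
    ∀ (js : List String) (row : PySem.Dict String (Option Int)) (y : String),
      (js.foldl (fun row j => row.insert j (d.getD (k, j) none)) row).get? y =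
        if y ∈ js then some (d.getD (k, y) none) else row.get? y := by
  intro js
  induction js with
  | nil => intro row y; simp
  | cons j tl ih =>
    intro row y
    simp only [List.foldl_cons]
    rw [ih, PySem.Dict.get?_insert]
    by_cases hyt : y ∈ tl <;> by_cases hyj : y = j <;> simp_all

lemma pvRelaxCellChar {rowk : PySem.Dict String (Option Int)} {i : String} {a : Int}
    (d : PySem.Dict (String × String) (Option Int)) (j : String) (cv : Option Int)
    (hcv : d.get? (i, j) = some cv) :
    (∀ y, (match rowk.getD j none with
        | none => d
        | some dkj =>
          match d.getD (i, j) none with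
          | none => d.insert (i, j) (some (a + dkj))
          | some dij => if a + dkj < dij then d.insert (i, j) (some (a + dkj)) else d).get? (i, y) =
      if y = j then some (pvComb cv (some a) (rowk.getD j none)) else d.get? (i, y)) ∧
    (∀ p : String × String, p.1 ≠ i → (match rowk.getD j none with
        | none => d
        | some dkj =>
          match d.getD (i, j) none with
          | none => d.insert (i, j) (some (a + dkj))
          | some dij => if a + dkj < dij then d.insert (i, j) (some (a + dkj)) else d).get? p =
      d.get? p) := by
  have hgd : d.getD (i, j) none = cv := PySem.Dict.getD_of_get?_eq_some _ _ hcv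
  cases hrk : rowk.getD j none with
  | none =>
    refine ⟨fun y => ?_, fun p _ => rfl⟩
    by_cases hyj : y = j
    · subst hyj; rw [if_pos rfl]; simp [pvComb, hcv]
    · rw [if_neg hyj]
  | some b =>
    rw [hgd]
    cases hcv2 : cv with
    | none =>
      refine ⟨fun y => ?_, fun p hp => ?_⟩
      · rw [PySem.Dict.get?_insert]
        by_cases hyj : y = j
        · subst hyj; rw [if_pos rfl, if_pos rfl]; simp [pvComb]
        · rw [if_neg (by simp [Prod.ext_iff, hyj]), if_neg hyj]
      · obtain ⟨x, y'⟩ := p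
        rw [PySem.Dict.get?_insert, if_neg (by simp [Prod.ext_iff]; intro hc; exact absurd hc hp)]
    | some c =>
      dsimp only
      by_cases hlt : a + b < c
      · rw [if_pos hlt]
        refine ⟨fun y => ?_, fun p hp => ?_⟩
        · rw [PySem.Dict.get?_insert]
          by_cases hyj : y = j
          · subst hyj; rw [if_pos rfl, if_pos rfl]; simp [pvComb, hlt]
          · rw [if_neg (by simp [Prod.ext_iff, hyj]), if_neg hyj]
        · obtain ⟨x, y'⟩ := p
          rw [PySem.Dict.get?_insert, if_neg (by simp [Prod.ext_iff]; intro hc; exact absurd hc hp)]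
      · rw [if_neg hlt]
        refine ⟨fun y => ?_, fun p _ => rfl⟩
        by_cases hyj : y = j
        · subst hyj; rw [if_pos rfl, ← hcv2, hcv]
          simp [pvComb, hcv2, hlt]
        · rw [if_neg hyj]

lemma pvRelaxRowFold {rowk : PySem.Dict String (Option Int)} {i : String} {a : Int} :
    ∀ (js : List String) (d : PySem.Dict (String × String) (Option Int)),
      (∀ y ∈ js, ∃ cv, d.get? (i, y) = some cv) →
      (∀ y, (js.foldl (fun d j =>
          match rowk.getD j none with
          | none => d
          | some dkj =>
            match d.getD (i, j) none with
            | none => d.insert (i, j) (some (a + dkj))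
            | some dij => if a + dkj < dij then d.insert (i, j) (some (a + dkj)) else d) d).get? (i, y) =
        if y ∈ js then some (pvComb (d.getD (i, y) none) (some a) (rowk.getD y none)) else d.get? (i, y)) ∧
      (∀ p : String × String, p.1 ≠ i → (js.foldl (fun d j =>
          match rowk.getD j none with
          | none => d
          | some dkj =>
            match d.getD (i, j) none with
            | none => d.insert (i, j) (some (a + dkj))
            | some dij => if a + dkj < dij then d.insert (i, j) (some (a + dkj)) else d) d).get? p =
        d.get? p) := by
  intro js
  induction js with
  | nil => intro d _; exact ⟨fun y => by simp, fun p _ => rfl⟩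
  | cons j tl ih =>
    intro d hpres
    obtain ⟨cv, hcv⟩ := hpres j List.mem_cons_self
    have hgd : d.getD (i, j) none = cv := PySem.Dict.getD_of_get?_eq_some _ _ hcv
    simp only [List.foldl_cons]
    obtain ⟨hs1, hs2⟩ := pvRelaxCellChar (rowk := rowk) (a := a) d j cv hcv
    have hpres1 : ∀ y ∈ tl, ∃ cv', (match rowk.getD j none with
        | none => d
        | some dkj =>
          match d.getD (i, j) none with
          | none => d.insert (i, j) (some (a + dkj))
          | some dij => if a + dkj < dij then d.insert (i, j) (some (a + dkj)) else d).get? (i, y) = some cv' := by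
      intro y hy
      rw [hs1 y]
      by_cases hyj : y = j
      · exact ⟨_, by rw [if_pos hyj]⟩
      · rw [if_neg hyj]
        exact hpres y (List.mem_cons_of_mem _ hy)
    obtain ⟨ih1, ih2⟩ := ih _ hpres1
    constructor
    · intro y
      rw [ih1 y]
      by_cases hyt : y ∈ tl
      · rw [if_pos hyt, if_pos (List.mem_cons_of_mem _ hyt)]
        by_cases hyj : y = j
        · rw [hyj]
          have : (match rowk.getD j none with
              | none => d
              | some dkj =>
                match d.getD (i, j) none with
                | none => d.insert (i, j) (some (a + dkj))
                | some dij => if a + dkj < dij then d.insert (i, j) (some (a + dkj)) else d).getD (i, j) none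
              = pvComb cv (some a) (rowk.getD j none) := by
            apply PySem.Dict.getD_of_get?_eq_some
            rw [hs1 j, if_pos rfl]
          rw [this, hgd, pvComb_idem]
        · have hEq : (match rowk.getD j none with
              | none => d
              | some dkj =>
                match d.getD (i, j) none with
                | none => d.insert (i, j) (some (a + dkj))
                | some dij => if a + dkj < dij then d.insert (i, j) (some (a + dkj)) else d).get? (i, y)
              = d.get? (i, y) := by
            rw [hs1 y, if_neg hyj]
          have : (match rowk.getD j none with
              | none => d
              | some dkj =>
                match d.getD (i, j) none with
                | none => d.insert (i, j) (some (a + dkj))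
                | some dij => if a + dkj < dij then d.insert (i, j) (some (a + dkj)) else d).getD (i, y) none
              = d.getD (i, y) none := by
            rw [PySem.Dict.getD_eq_get?_getD, hEq, ← PySem.Dict.getD_eq_get?_getD]
          rw [this]
      · rw [if_neg hyt, hs1 y]
        by_cases hyj : y = j
        · rw [hyj, if_pos rfl, if_pos List.mem_cons_self, hgd]
        · rw [if_neg hyj, if_neg (by simp [List.mem_cons, hyj, hyt])]
    · intro p hp
      rw [ih2 p hp, hs2 p hp]

lemma pvRoundFold {all : List String} {k : String} {rowk : PySem.Dict String (Option Int)}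
    {dstart : PySem.Dict (String × String) (Option Int)}
    (hrowk : ∀ y ∈ all, rowk.getD y none = dstart.getD (k, y) none)
    (hdiag : dstart.getD (k, k) none = some 0) (hkall : k ∈ all) :
    ∀ (is : List String) (P : List String) (dc : PySem.Dict (String × String) (Option Int)),
      (∀ x ∈ is, x ∈ all) →
      (∀ x ∈ all, ∀ y ∈ all, dc.get? (x, y) = some (if x ∈ P then
          pvComb (dstart.getD (x, y) none) (dstart.getD (x, k) none) (dstart.getD (k, y) none)
        else dstart.getD (x, y) none)) →
      ∀ x ∈ all, ∀ y ∈ all,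
        (is.foldl (fun d i => match d.getD (i, k) none with
          | none => d
          | some dik => pvFWRelaxRow all rowk i dik d) dc).get? (x, y) =
          some (if x ∈ P ∨ x ∈ is then
            pvComb (dstart.getD (x, y) none) (dstart.getD (x, k) none) (dstart.getD (k, y) none)
          else dstart.getD (x, y) none) := by
  intro is
  induction is with
  | nil =>
    intro P dc _ hP x hx y hy
    simp only [List.foldl_nil, List.not_mem_nil, or_false]
    exact hP x hx y hy
  | cons i0 tl ih =>
    intro P dc his hP x hx y hy
    have hi0 : i0 ∈ all := his i0 List.mem_cons_self
    simp only [List.foldl_cons]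
    -- the value read for dist[(i0, k)] is the round-start value d(i0, k)
    have hio_k : dc.getD (i0, k) none = dstart.getD (i0, k) none := by
      have := hP i0 hi0 k hkall
      rw [PySem.Dict.getD_of_get?_eq_some _ _ this]
      by_cases hi0P : i0 ∈ P
      · rw [if_pos hi0P, hdiag, pvComb_self_zero]
      · rw [if_neg hi0P]
    cases hcik : dstart.getD (i0, k) none with
    | none =>
      rw [hio_k, hcik]
      have hP' : ∀ x ∈ all, ∀ y ∈ all, dc.get? (x, y) = some (if x ∈ i0 :: P then
          pvComb (dstart.getD (x, y) none) (dstart.getD (x, k) none) (dstart.getD (k, y) none)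
        else dstart.getD (x, y) none) := by
        intro x hx y hy
        rw [hP x hx y hy]
        by_cases hxi : x = i0
        · subst hxi
          rw [hcik, pvComb_eq_dij (Or.inl rfl)]
          by_cases hxP : x ∈ P <;> simp [hxP]
        · by_cases hxP : x ∈ P <;> simp [hxP, hxi, List.mem_cons]
      have := ih (i0 :: P) dc (fun z hz => his z (List.mem_cons_of_mem _ hz)) hP' x hx y hy
      rw [this]
      by_cases hxP : x ∈ P <;> by_cases hxi : x = i0 <;> by_cases hxt : x ∈ tl <;>
        simp [hxP, hxi, hxt, List.mem_cons]
    | some a =>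
      rw [hio_k, hcik]
      -- apply the row lemma
      have hpresrow : ∀ y ∈ all, ∃ cv, dc.get? (i0, y) = some cv :=
        fun y hy => ⟨_, hP i0 hi0 y hy⟩
      obtain ⟨hr1, hr2⟩ := pvRelaxRowFold (rowk := rowk) (i := i0) (a := a) all dc hpresrow
      have hP' : ∀ x ∈ all, ∀ y ∈ all,
          (pvFWRelaxRow all rowk i0 a dc).get? (x, y) = some (if x ∈ i0 :: P then
            pvComb (dstart.getD (x, y) none) (dstart.getD (x, k) none) (dstart.getD (k, y) none)
          else dstart.getD (x, y) none) := by
        intro x hx y hy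
        by_cases hxi : x = i0
        · subst hxi
          rw [show pvFWRelaxRow all rowk x a dc = (all.foldl (fun d j =>
              match rowk.getD j none with
              | none => d
              | some dkj =>
                match d.getD (x, j) none with
                | none => d.insert (x, j) (some (a + dkj))
                | some dij => if a + dkj < dij then d.insert (x, j) (some (a + dkj)) else d) dc) from rfl]
          rw [hr1 y, if_pos hy, hrowk y hy]
          have hcur : dc.getD (x, y) none = (if x ∈ P then
              pvComb (dstart.getD (x, y) none) (dstart.getD (x, k) none) (dstart.getD (k, y) none)
            else dstart.getD (x, y) none) :=
            PySem.Dict.getD_of_get?_eq_some _ _ (hP x hi0 y hy)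
          rw [hcur]
          by_cases hxP : x ∈ P
          · rw [if_pos hxP, if_pos List.mem_cons_self, hcik, pvComb_idem]
          · rw [if_neg hxP, if_pos List.mem_cons_self, hcik]
        · rw [show pvFWRelaxRow all rowk i0 a dc = (all.foldl (fun d j =>
              match rowk.getD j none with
              | none => d
              | some dkj =>
                match d.getD (i0, j) none with
                | none => d.insert (i0, j) (some (a + dkj))
                | some dij => if a + dkj < dij then d.insert (i0, j) (some (a + dkj)) else d) dc) from rfl]
          rw [hr2 (x, y) hxi, hP x hx y hy]
          by_cases hxP : x ∈ P <;> simp [hxP, hxi, List.mem_cons]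
      have := ih (i0 :: P) (pvFWRelaxRow all rowk i0 a dc)
        (fun z hz => his z (List.mem_cons_of_mem _ hz)) hP' x hx y hy
      rw [this]
      by_cases hxP : x ∈ P <;> by_cases hxi : x = i0 <;> by_cases hxt : x ∈ tl <;>
        simp [hxP, hxi, hxt, List.mem_cons]

lemma pvRoundChar {all : List String} {k : String} (hk : k ∈ all)
    {d : PySem.Dict (String × String) (Option Int)}
    (hpres : ∀ i ∈ all, ∀ j ∈ all, ∃ c, d.get? (i, j) = some c)
    (hdiag : d.getD (k, k) none = some 0) :
    ∀ i ∈ all, ∀ j ∈ all, (pvFWRound all d k).get? (i, j) =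
      some (pvComb (d.getD (i, j) none) (d.getD (i, k) none) (d.getD (k, j) none)) := by
  intro i hi j hj
  have hrowk : ∀ y ∈ all, (all.foldl
      (fun (row : PySem.Dict String (Option Int)) j => row.insert j (d.getD (k, j) none))
      PySem.Dict.empty).getD y none = d.getD (k, y) none := by
    intro y hy
    rw [PySem.Dict.getD_eq_get?_getD, pvRowkChar, if_pos hy]
    rfl
  have hP0 : ∀ x ∈ all, ∀ y ∈ all, d.get? (x, y) = some (if x ∈ ([] : List String) then
      pvComb (d.getD (x, y) none) (d.getD (x, k) none) (d.getD (k, y) none)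
    else d.getD (x, y) none) := by
    intro x hx y hy
    obtain ⟨c, hc⟩ := hpres x hx y hy
    rw [hc, PySem.Dict.getD_of_get?_eq_some _ _ hc]
    simp
  have := pvRoundFold (rowk := (all.foldl
      (fun (row : PySem.Dict String (Option Int)) j => row.insert j (d.getD (k, j) none))
      PySem.Dict.empty)) (dstart := d) hrowk hdiag hk all [] d (fun z hz => hz) hP0 i hi j hj
  rw [show pvFWRound all d k = (all.foldl (fun dd i => match dd.getD (i, k) none with
      | none => dd
      | some dik => pvFWRelaxRow all (all.foldl
          (fun (row : PySem.Dict String (Option Int)) j => row.insert j (d.getD (k, j) none))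
          PySem.Dict.empty) i dik dd) d) from rfl]
  rw [this, if_pos (Or.inr hi)]

lemma pvKLoop {E : String → String → Prop} {all : List String} :
    ∀ (ks K : List String) (d : PySem.Dict (String × String) (Option Int)),
      (∀ x ∈ ks, x ∈ all) → pvGood E all K d →
      pvGood E all (K ++ ks) (ks.foldl (pvFWRound all) d) := by
  intro ks
  induction ks with
  | nil => intro K d _ h; simpa using h
  | cons k tl ih =>
    intro K d hks hgood
    have hk : k ∈ all := hks k List.mem_cons_self
    have hpres : ∀ i ∈ all, ∀ j ∈ all, ∃ c, d.get? (i, j) = some c := by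
      intro i hi j hj
      obtain ⟨c, hc, _⟩ := hgood i hi j hj
      exact ⟨c, hc⟩
    have hdiag : d.getD (k, k) none = some 0 := by
      obtain ⟨c, hc, hcc⟩ := hgood k hk k hk
      rw [PySem.Dict.getD_of_get?_eq_some _ _ hc]
      rcases hcc with ⟨_, h⟩ | ⟨h, _⟩
      · exact h
      · exact absurd rfl h
    have hround := pvRoundChar hk hpres hdiag
    have hstep : pvGood E all (K ++ [k]) (pvFWRound all d k) :=
      pvGoodStep hk hgood hround
    have := ih (K ++ [k]) (pvFWRound all d k) (fun z hz => hks z (List.mem_cons_of_mem _ hz)) hstep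
    simpa [List.append_assoc] using this

-- the final FW matrix answers every pair
lemma pvFWAns {conn : PySem.Dict String (List String)} {all : List String}
    {dfin : PySem.Dict (String × String) (Option Int)}
    (hfull : pvGood (pvE conn all) all all dfin)
    {s t : String} (hs : s ∈ all) (ht : t ∈ all) :
    pvAns (pvE conn all) s t (match dfin.getD (s, t) none with | some v => v | none => -1) := by
  obtain ⟨c, hget, hc⟩ := hfull s hs t ht
  rw [PySem.Dict.getD_of_get?_eq_some _ _ hget]
  have hPIn_iff : ∀ n : Nat, pvPIn (pvE conn all) all s t n ↔
      ∃ ws, pvIsPath (pvE conn all) s ws t ∧ ws.length + 1 = n := by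
    intro n
    constructor
    · rintro ⟨ws, hp, hl, _⟩; exact ⟨ws, hp, hl⟩
    · rintro ⟨ws, hp, hl⟩; exact ⟨ws, hp, hl, pvE_path_mem ws s t hp⟩
  rcases hc with ⟨hst, hc0⟩ | ⟨hneq, hS, hN⟩
  · subst hst
    rw [hc0]
    exact Or.inl ⟨0, rfl, pvHPL_zero s, fun m _ => Nat.zero_le m⟩
  · cases hcv : c with
    | some v =>
      obtain ⟨n, hn, hp, hmin⟩ := (hS v).mp hcv
      refine Or.inl ⟨n, hn, ?_, ?_⟩
      · obtain ⟨ws, hpath, hl⟩ := (hPIn_iff n).mp hp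
        exact Or.inr ⟨ws, hpath, hl⟩
      · intro m hm
        rcases hm with ⟨_, hts⟩ | ⟨ws, hpath, hl⟩
        · exact absurd hts.symm hneq
        · exact hmin m ((hPIn_iff m).mpr ⟨ws, hpath, hl⟩)
    | none =>
      refine Or.inr ⟨rfl, ?_⟩
      intro n hn
      rcases hn with ⟨_, hts⟩ | ⟨ws, hpath, hl⟩
      · exact absurd hts.symm hneq
      · exact (hN.mp hcv) n ((hPIn_iff n).mpr ⟨ws, hpath, hl⟩)

-- ===== VERDICT =====
theorem get_valve_rooms_min_steps_spec : Claim_equal_get_valve_rooms_min_steps := by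
  unfold Claim_equal_get_valve_rooms_min_steps
  intro all_room_names connections valve_room_names _ hpre
  unfold Spec_get_valve_rooms_min_steps
  rcases eq_or_ne valve_room_names [] with hnil | hne
  · subst hnil; rfl
  · rcases hpre with hnil | ⟨hvalve, hkeys⟩
    · exact absurd hnil hne
    · simp only [get_valve_rooms_min_steps, get_valve_rooms_min_steps_alt]
      congr 1
      apply congrArg
      apply PySem.List.foldl_congr_mem
      intro acc s hsv
      congr 1
      apply PySem.List.foldl_congr_mem
      intro m room hroomv
      congr 1
      have hs := hvalve s hsv
      have hroom := hvalve room hroomv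
      obtain ⟨w, hA, hB⟩ := pvMain all_room_names connections hkeys s hs room hroom
      rw [hA]
      have hAnsL : pvAns (pvE (PySem.Dict.ofList connections) all_room_names) s room w := by
        have hinv := pvInvInit (all := all_room_names)
          (conn := PySem.Dict.ofList connections) (s := s) hs
        have hcnt : pvCntB all_room_names (PySem.Dict.empty.insert s 0) + 1
            ≤ all_room_names.length + 1 := by
          have h1 : pvCntB all_room_names (PySem.Dict.empty.insert s 0)
              ≤ (PySem.Set.ofList all_room_names).length := List.length_filter_le _ _
          have h2 := PySem.Set.length_ofList_le all_room_names
          omega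
        have hth := pvLevelBCorrect (all := all_room_names)
          (conn := PySem.Dict.ofList connections) (s := s)
          (all_room_names.length + 1) 0 (PySem.Dict.empty.insert s 0) [s] hinv hcnt room
        rw [Nat.cast_zero, hB] at hth
        exact hth
      have hgood := pvKLoop (E := pvE (PySem.Dict.ofList connections) all_room_names)
        all_room_names [] _ (fun x hx => hx)
        (pvGoodInit (PySem.Dict.ofList connections) all_room_names)
      rw [List.nil_append] at hgood
      exact pvAns_unique hAnsL (pvFWAns hgood hs hroom)
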